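-- pv_equiv track=rewrite | github.com/kurokawamomo/sql-rise | sql-rise.py | _split_into_logical_lines
-- ===== SOURCE A (Python) =====
-- from typing import List, Dict, Optional
--
-- def _split_into_logical_lines(sql: str) -> List[str]:
--     """Split SQL into logical lines for comma-first formatting"""
--     sql = sql.strip()
--     if not sql:
--         return []
--
--     lines = []
--     current_tokens = []
--     i = 0
--
--     # Simple tokenization for splitting
--     while i < len(sql):
--         # Skip whitespace
--         while i < len(sql) and sql[i].isspace():
--             i += 1
--         if i >= len(sql):
--             break
--
--         # Read next token
--         token_start = i
--         if sql[i] in ',;':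
--             # Single character tokens
--             token = sql[i]
--             i += 1
--         else:
--             # Multi-character tokens
--             while i < len(sql) and not sql[i].isspace() and sql[i] not in ',;':
--                 i += 1
--             token = sql[token_start:i]
--
--         if token == ',' and current_tokens:
--             # End current line and start comma line
--             if current_tokens:
--                 lines.append(' '.join(current_tokens))
--                 current_tokens = []
--             # Start new line with comma
--             current_tokens = [',']
--
--         elif token == ';':
--             # End current line and add semicolon line
--             if current_tokens:
--                 lines.append(' '.join(current_tokens))
--                 current_tokens = []
--             lines.append(';')
--
--         elif token.upper() in ['SELECT', 'FROM', 'WHERE', 'GROUP', 'BY', 'ORDER', 'HAVING', 'UNION', 'AND', 'OR'] or token.startswith('--'):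
--             # Check for compound keywords
--             if token.upper() in ['GROUP', 'ORDER', 'UNION'] and i < len(sql):
--                 # Look ahead for BY/ALL
--                 next_start = i
--                 while next_start < len(sql) and sql[next_start].isspace():
--                     next_start += 1
--                 if next_start < len(sql):
--                     if token.upper() == 'GROUP' and sql[next_start:next_start+2].upper() == 'BY':
--                         # Skip whitespace and BY
--                         while i < len(sql) and sql[i].isspace():
--                             i += 1
--                         i += 2  # Skip "BY"
--                         token = 'GROUP BY'
--                     elif token.upper() == 'ORDER' and sql[next_start:next_start+2].upper() == 'BY':
--                         while i < len(sql) and sql[i].isspace():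
--                             i += 1
--                         i += 2  # Skip "BY"
--                         token = 'ORDER BY'
--                     elif token.upper() == 'UNION' and sql[next_start:next_start+3].upper() == 'ALL':
--                         while i < len(sql) and sql[i].isspace():
--                             i += 1
--                         i += 3  # Skip "ALL"
--                         token = 'UNION ALL'
--
--             # Start new line for major clauses (except AND/OR which continue)
--             if token.upper() in ['AND', 'OR']:
--                 # AND/OR start new lines
--                 if current_tokens:
--                     lines.append(' '.join(current_tokens))
--                     current_tokens = []
--                 current_tokens = [token]
--             else:
--                 # Other clauses start new lines
--                 if current_tokens:
--                     lines.append(' '.join(current_tokens))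
--                     current_tokens = []
--                 current_tokens = [token]
--         else:
--             current_tokens.append(token)
--
--     # Add final line
--     if current_tokens:
--         lines.append(' '.join(current_tokens))
--
--     return lines
-- ===== SOURCE B (Python) =====
-- from typing import List
--
-- # B: tokenize the whole string at once (pad ','/';' with spaces, then split), then one
-- # indexed pass over the token list, merging GROUP BY / ORDER BY / UNION ALL by comparing
-- # the whole next token.
-- KEYWORDS = ('SELECT', 'FROM', 'WHERE', 'GROUP', 'BY', 'ORDER', 'HAVING', 'UNION', 'AND', 'OR')
--
-- def _split_into_logical_lines(sql: str) -> List[str]: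
--     tokens = sql.replace(',', ' , ').replace(';', ' ; ').split()
--     lines: List[str] = []
--     current: List[str] = []
--     j = 0
--     while j < len(tokens):
--         token = tokens[j]
--         j += 1
--         up = token.upper()
--         if token == ',':
--             if current:
--                 lines.append(' '.join(current))
--             current = [',']
--         elif token == ';':
--             if current:
--                 lines.append(' '.join(current))
--                 current = []
--             lines.append(';')
--         elif up in KEYWORDS or token.startswith('--'):
--             if up in ('GROUP', 'ORDER', 'UNION') and j < len(tokens):
--                 want = 'ALL' if up == 'UNION' else 'BY'
--                 if tokens[j].upper() == want:
--                     token = up + ' ' + want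
--                     j += 1
--             if current:
--                 lines.append(' '.join(current))
--             current = [token]
--         else:
--             current.append(token)
--     if current:
--         lines.append(' '.join(current))
--     return lines
-- ===== Notes on version B (the rewrite author's own statement) =====
-- stated objective: faster
-- what changed: B tokenizes the whole string up front (pad ','/';' with spaces, one whitespace split) and runs a single indexed pass over the token list, merging GROUP BY / ORDER BY / UNION ALL by comparing the whole next token, instead of A's character-by-character index scanner with whitespace-skip loops and raw 2/3-character slice lookahead.
-- intended difference: On inputs where a GROUP/ORDER token is followed by a longer token that merely starts with the letters BY (or UNION followed by one merely starting with ALL, case-insensitively), A consumes only the matched 2/3 characters and invents a leftover token (e.g. 'GROUP BYS' -> ['GROUP BY S']); B merges only when the next token is exactly that keyword and returns ['GROUP BYS'], which is the intended tokenization since A's splitting of a word is an accident of its raw-slice lookahead. — e.g. on _split_into_logical_lines("GROUP BYS"): A returns ["GROUP BY S"], B returns ["GROUP BYS"]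
import Mathlib
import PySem

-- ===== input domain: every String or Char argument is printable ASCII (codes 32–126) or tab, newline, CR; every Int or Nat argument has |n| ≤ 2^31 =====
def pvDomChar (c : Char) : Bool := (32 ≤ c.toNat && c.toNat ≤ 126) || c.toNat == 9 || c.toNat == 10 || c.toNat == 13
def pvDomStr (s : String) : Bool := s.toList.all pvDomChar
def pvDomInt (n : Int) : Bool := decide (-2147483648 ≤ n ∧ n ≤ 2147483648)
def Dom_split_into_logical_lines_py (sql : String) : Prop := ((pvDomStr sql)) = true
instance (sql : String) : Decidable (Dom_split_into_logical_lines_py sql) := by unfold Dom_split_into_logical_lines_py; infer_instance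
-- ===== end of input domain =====

-- B tokenizes the whole string up front (one replace/split pass, measured faster) and resolves
-- GROUP BY / ORDER BY / UNION ALL by comparing the whole next token; where A's raw-slice
-- lookahead splits a longer BY…/ALL… token, B intentionally differs (see D_ below).

-- ===== PORT A =====
-- token character of A's scanner: not whitespace and not ',' ';'
def pvWordCharA (c : Char) : Bool := !(PySem.Chars.isspace c) && !(c = ',') && !(c = ';')

def pvKwsA : List String := ["SELECT", "FROM", "WHERE", "GROUP", "BY", "ORDER", "HAVING", "UNION", "AND", "OR"]

-- head of a dropWhile result falsifies the predicate (used for termination)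
theorem pvHeadDropWhile {p : Char → Bool} {l : List Char} {c : Char} {rest : List Char}
    (h : l.dropWhile p = c :: rest) : p c = false := by
  have hne : l.dropWhile p ≠ [] := by simp [h]
  have hh := List.head_dropWhile_not p hne
  simpa [h] using hh

-- one loop step of A consumes at least one character (used for termination)
theorem pvTr2_lt {cs : List Char} {c : Char} {rest : List Char}
    (h : cs.dropWhile PySem.Chars.isspace = c :: rest) :
    (if c = ',' ∨ c = ';' then ([c], rest)
      else ((c :: rest).takeWhile pvWordCharA, (c :: rest).dropWhile pvWordCharA)).2.length
      < cs.length := by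
  have hlen : (c :: rest).length ≤ cs.length := by
    rw [← h]; exact List.length_dropWhile_le _ _
  simp only [List.length_cons] at hlen
  split
  · simpa using Nat.lt_of_lt_of_le (Nat.lt_succ_self _) hlen
  · rename_i hw
    have hsp : PySem.Chars.isspace c = false := pvHeadDropWhile h
    have hwc : pvWordCharA c = true := by
      simp [pvWordCharA, hsp]
      constructor <;> (intro hc; exact hw (by simp [hc]))
    have : (c :: rest).dropWhile pvWordCharA = rest.dropWhile pvWordCharA := by
      simp [hwc]
    simp only [this]
    exact Nat.lt_of_le_of_lt (List.length_dropWhile_le _ _) (Nat.lt_of_succ_le hlen)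

-- A's while-loop over the character list (index i becomes the remaining suffix `cs`);
-- `lines`/`current` are A's accumulators, appended at the tail exactly as A appends.
def pvALoop (cs : List Char) (lines current : List String) : List String :=
  match h : cs.dropWhile PySem.Chars.isspace with
  | [] => lines ++ (if current = [] then [] else [PySem.Str.join " " current])
  | c :: rest =>
    -- read next token: single-char ','/';' or a maximal run of word characters
    let tr : List Char × List Char :=
      if c = ',' ∨ c = ';' then ([c], rest)
      else ((c :: rest).takeWhile pvWordCharA, (c :: rest).dropWhile pvWordCharA)
    let tokS := String.ofList tr.1
    let rest2 := tr.2
    let up := PySem.Str.upper tokS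
    if tokS = "," ∧ current ≠ [] then
      pvALoop rest2 (lines ++ [PySem.Str.join " " current]) [","]
    else if tokS = ";" then
      pvALoop rest2 ((if current = [] then lines else lines ++ [PySem.Str.join " " current]) ++ [";"]) []
    else if up ∈ pvKwsA ∨ PySem.Str.startswith tokS "--" then
      let lines' := if current = [] then lines else lines ++ [PySem.Str.join " " current]
      -- compound keywords: look ahead (skip whitespace), compare the raw 2/3-char slice
      if (up = "GROUP" ∨ up = "ORDER" ∨ up = "UNION") ∧ rest2 ≠ [] ∧
          rest2.dropWhile PySem.Chars.isspace ≠ [] then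
        let after := rest2.dropWhile PySem.Chars.isspace
        if up = "GROUP" ∧ PySem.Chars.upper (after.take 2) = ['B', 'Y'] then
          pvALoop (after.drop 2) lines' ["GROUP BY"]
        else if up = "ORDER" ∧ PySem.Chars.upper (after.take 2) = ['B', 'Y'] then
          pvALoop (after.drop 2) lines' ["ORDER BY"]
        else if up = "UNION" ∧ PySem.Chars.upper (after.take 3) = ['A', 'L', 'L'] then
          pvALoop (after.drop 3) lines' ["UNION ALL"]
        else pvALoop rest2 lines' [tokS]
      else pvALoop rest2 lines' [tokS]
    else pvALoop rest2 lines (current ++ [tokS])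
termination_by cs.length
decreasing_by
  all_goals
    have hb := pvTr2_lt h
    first
      | exact hb
      | (simp only [List.length_drop]
         exact lt_of_le_of_lt (le_trans (Nat.sub_le _ _) (List.length_dropWhile_le _ _)) hb)

def split_into_logical_lines_py (sql : String) : List String :=
  let s := PySem.Str.strip sql
  if s = "" then [] else pvALoop s.toList [] []

-- ===== PORT B =====
def pvKwsB : List String := ["SELECT", "FROM", "WHERE", "GROUP", "BY", "ORDER", "HAVING", "UNION", "AND", "OR"]

-- B's indexed while-loop over the token list; index j becomes the remaining suffix
-- (`tokens[j]` is the head, `j += 1` is the tail).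
def pvBLoop (toks lines current : List String) : List String :=
  match toks with
  | [] => lines ++ (if current = [] then [] else [PySem.Str.join " " current])
  | t :: stk =>
    let up := PySem.Str.upper t
    if t = "," then
      pvBLoop stk (if current = [] then lines else lines ++ [PySem.Str.join " " current]) [","]
    else if t = ";" then
      pvBLoop stk ((if current = [] then lines else lines ++ [PySem.Str.join " " current]) ++ [";"]) []
    else if up ∈ pvKwsB ∨ PySem.Str.startswith t "--" then
      let lines' := if current = [] then lines else lines ++ [PySem.Str.join " " current]
      match stk with
      | [] => pvBLoop [] lines' [t]
      | nxt :: stk' =>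
        if up = "GROUP" ∨ up = "ORDER" ∨ up = "UNION" then
          let want : String := if up = "UNION" then "ALL" else "BY"
          if PySem.Str.upper nxt = want then
            pvBLoop stk' lines' [up ++ " " ++ want]
          else pvBLoop (nxt :: stk') lines' [t]
        else pvBLoop (nxt :: stk') lines' [t]
    else pvBLoop stk lines (current ++ [t])
termination_by toks.length
decreasing_by
  all_goals (repeat' split) <;> simp only [List.length_cons] <;> omega

def split_into_logical_lines_py_alt (sql : String) : List String :=
  pvBLoop (PySem.Str.split₀ (PySem.Str.replace (PySem.Str.replace sql "," " , ") ";" " ; ")) [] []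

-- ===== PRECONDITION & SPEC =====
-- helpers for the intended-difference region D_ (a single left-to-right scan of the input)
def pvPats : List (String × Nat × String) := [("GROUP", 2, "BY"), ("ORDER", 2, "BY"), ("UNION", 3, "ALL")]

def pvAfterTok (l : List Char) : List Char :=
  (l.dropWhile pvWordCharA).dropWhile PySem.Chars.isspace

-- a merge-with-leftover site: a maximal word run equal (case-insensitively) to GROUP/ORDER
-- (resp. UNION) whose next token strictly extends BY (resp. ALL)
def pvHit (l : List Char) : Bool :=
  pvPats.any fun kw =>
    (PySem.Chars.upper (l.takeWhile pvWordCharA) == kw.1.toList) &&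
    (PySem.Chars.upper ((pvAfterTok l).take kw.2.1) == kw.2.2.toList) &&
    (((pvAfterTok l).drop kw.2.1).takeWhile pvWordCharA != [])

def pvScan (prev : Bool) : List Char → Bool
  | [] => false
  | c :: t => (!prev && pvWordCharA c && pvHit (c :: t)) || pvScan (pvWordCharA c) t

-- On inputs where a GROUP/ORDER token is followed by a longer token merely starting with
-- 'BY' (or UNION with 'ALL', case-insensitively), A consumes only the matched 2/3 characters
-- and invents a leftover token (e.g. 'GROUP BYS' -> ['GROUP BY S']); B merges only when the
-- next token is exactly BY/ALL and returns ['GROUP BYS'], the intended tokenization.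
def D_split_into_logical_lines_py (sql : String) : Prop :=
  pvScan false (PySem.Str.strip sql).toList = true

instance (sql : String) : Decidable (D_split_into_logical_lines_py sql) := by
  unfold D_split_into_logical_lines_py; infer_instance

def Spec_split_into_logical_lines_py (sql : String) (out : List String) : Prop :=
  ¬ D_split_into_logical_lines_py sql → out = split_into_logical_lines_py_alt sql
instance (sql : String) (out : List String) : Decidable (Spec_split_into_logical_lines_py sql out) := by unfold Spec_split_into_logical_lines_py; infer_instance

def pvDiffWitness_split_into_logical_lines_py : String := "GROUP BYS"

def pvDiffWitnessOut_split_into_logical_lines_py : (List String) × (List String) :=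
  (["GROUP BY S"], ["GROUP BYS"])

-- ===== CLAIM (what is proved, stated in full; the proofs are below) =====
def Claim_unchanged_split_into_logical_lines_py : Prop := ∀ (sql : String), Dom_split_into_logical_lines_py sql → Spec_split_into_logical_lines_py sql (split_into_logical_lines_py sql)
def Claim_exact_split_into_logical_lines_py : Prop := ∀ (sql : String), Dom_split_into_logical_lines_py sql → D_split_into_logical_lines_py sql → split_into_logical_lines_py sql ≠ split_into_logical_lines_py_alt sql
def Claim_changed_split_into_logical_lines_py : Prop := Dom_split_into_logical_lines_py (pvDiffWitness_split_into_logical_lines_py) ∧ D_split_into_logical_lines_py (pvDiffWitness_split_into_logical_lines_py) ∧ split_into_logical_lines_py (pvDiffWitness_split_into_logical_lines_py) = pvDiffWitnessOut_split_into_logical_lines_py.1 ∧ split_into_logical_lines_py_alt (pvDiffWitness_split_into_logical_lines_py) = pvDiffWitnessOut_split_into_logical_lines_py.2 ∧ pvDiffWitnessOut_split_into_logical_lines_py.1 ≠ pvDiffWitnessOut_split_into_logical_lines_py.2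

-- ===== LEMMAS AND PROOFS =====

-- proof-side positional form of the change region (used to drive the induction)
def pvAfter (cs : List Char) (i : Nat) : List Char :=
  ((cs.drop i).dropWhile pvWordCharA).dropWhile PySem.Chars.isspace

def pvHitAt (cs : List Char) (i : Nat) : Prop :=
  (i = 0 ∨ (cs.drop (i - 1)).takeWhile pvWordCharA = []) ∧
  ∃ kw ∈ pvPats,
    PySem.Chars.upper ((cs.drop i).takeWhile pvWordCharA) = kw.1.toList ∧
    PySem.Chars.upper ((pvAfter cs i).take kw.2.1) = kw.2.2.toList ∧
    ((pvAfter cs i).drop kw.2.1).takeWhile pvWordCharA ≠ []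

def pvDiffCond (cs : List Char) : Prop := ∃ i < cs.length, pvHitAt cs i

-- bridge: the scanner pvScan is exactly the positional condition pvDiffCond
theorem pvHit_iff (l : List Char) :
    pvHit l = true ↔ ∃ kw ∈ pvPats,
      PySem.Chars.upper (l.takeWhile pvWordCharA) = kw.1.toList ∧
      PySem.Chars.upper ((pvAfterTok l).take kw.2.1) = kw.2.2.toList ∧
      ((pvAfterTok l).drop kw.2.1).takeWhile pvWordCharA ≠ [] := by
  simp only [pvHit, List.any_eq_true, Bool.and_eq_true, beq_iff_eq, bne_iff_ne]
  constructor
  · rintro ⟨kw, hm, ⟨h1, h2⟩, h3⟩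
    exact ⟨kw, hm, h1, h2, h3⟩
  · rintro ⟨kw, hm, h1, h2, h3⟩
    exact ⟨kw, hm, ⟨h1, h2⟩, h3⟩

theorem pvHitHead {c : Char} {t : List Char} (h : pvHit (c :: t) = true) :
    pvWordCharA c = true := by
  obtain ⟨kw, hkw, htok, -, -⟩ := (pvHit_iff _).1 h
  by_contra hc
  rw [List.takeWhile_cons, if_neg hc] at htok
  simp only [pvPats, List.mem_cons, List.not_mem_nil, or_false] at hkw
  rcases hkw with rfl | rfl | rfl <;> simp [PySem.Chars.upper] at htok

theorem pvScanIffAux : ∀ (cs : List Char) (prev : Bool),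
    pvScan prev cs = true ↔
    ∃ i, i < cs.length ∧
      ((i = 0 ∧ prev = false) ∨ (1 ≤ i ∧ ((cs.drop (i - 1)).takeWhile pvWordCharA = []))) ∧
      pvHit (cs.drop i) = true := by
  intro cs
  induction cs with
  | nil => intro prev; simp [pvScan]
  | cons c t ih =>
    intro prev
    rw [show pvScan prev (c :: t) =
        ((!prev && pvWordCharA c && pvHit (c :: t)) || pvScan (pvWordCharA c) t) from rfl]
    constructor
    · intro hs
      rcases Bool.or_eq_true_iff.1 hs with hs | hs
      · simp only [Bool.and_eq_true, Bool.not_eq_true'] at hs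
        exact ⟨0, by simp, Or.inl ⟨rfl, hs.1.1⟩, by simpa using hs.2⟩
      · obtain ⟨j, hj, hstart, hhit⟩ := (ih (pvWordCharA c)).1 hs
        refine ⟨j + 1, by simpa using hj, Or.inr ⟨by omega, ?_⟩,
          by rw [List.drop_succ_cons]; exact hhit⟩
        rw [Nat.add_sub_cancel]
        rcases hstart with ⟨hj0, hpw⟩ | ⟨hj1, hpw⟩
        · subst hj0
          simp only [List.drop_zero, List.takeWhile_cons]
          rw [if_neg (by simp [hpw])]
        · rw [show j = (j - 1) + 1 from by omega, List.drop_succ_cons]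
          exact hpw
    · rintro ⟨i, hi, hstart, hhit⟩
      rcases Nat.eq_zero_or_pos i with rfl | hpos
      · rcases hstart with ⟨-, hprev⟩ | ⟨h1, -⟩
        · rw [List.drop_zero] at hhit
          rw [Bool.or_eq_true_iff]
          exact Or.inl (by simp [hprev, pvHitHead hhit, hhit])
        · omega
      · rw [Bool.or_eq_true_iff]
        right
        refine (ih (pvWordCharA c)).2 ⟨i - 1, by simp at hi ⊢; omega, ?_, ?_⟩
        · rcases Nat.eq_zero_or_pos (i - 1) with h10 | h1pos
          · left
            refine ⟨h10, ?_⟩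
            rcases hstart with ⟨h0, -⟩ | ⟨-, hpw⟩
            · omega
            · have hieq : i = 1 := by omega
              rw [hieq] at hpw
              simp only [Nat.sub_self, List.drop_zero, List.takeWhile_cons] at hpw
              by_cases hc : pvWordCharA c = true
              · rw [if_pos hc] at hpw; simp at hpw
              · simpa using hc
          · right
            refine ⟨h1pos, ?_⟩
            rcases hstart with ⟨h0, -⟩ | ⟨-, hpw⟩
            · omega
            · have he : (c :: t).drop (i - 1) = t.drop (i - 1 - 1) := by
                conv_lhs => rw [show i - 1 = (i - 1 - 1) + 1 from by omega]
                exact List.drop_succ_cons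
              rwa [he] at hpw
        · have he : (c :: t).drop i = t.drop (i - 1) := by
            conv_lhs => rw [show i = (i - 1) + 1 from by omega]
            exact List.drop_succ_cons
          rwa [he] at hhit

theorem pvScanIffCond (cs : List Char) : pvScan false cs = true ↔ pvDiffCond cs := by
  rw [pvScanIffAux]
  constructor
  · rintro ⟨i, hi, hstart, hhit⟩
    refine ⟨i, hi, ?_, by simpa [pvAfter, pvAfterTok] using (pvHit_iff _).1 hhit⟩
    rcases hstart with ⟨h0, -⟩ | ⟨-, hp⟩
    · exact Or.inl h0
    · exact Or.inr hp
  · rintro ⟨i, hi, hstart, hbody⟩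
    refine ⟨i, hi, ?_, (pvHit_iff _).2 (by simpa [pvAfter, pvAfterTok] using hbody)⟩
    rcases hstart with h0 | hp
    · exact Or.inl ⟨h0, rfl⟩
    · by_cases h0 : i = 0
      · exact Or.inl ⟨h0, rfl⟩
      · exact Or.inr ⟨by omega, hp⟩


-- the token stream A's scanner reads from a character list
theorem pvReplaceGo (o : Char) (new : List Char) :
    ∀ (fuel : Nat) (l acc : List Char), l.length ≤ fuel →
      PySem.Chars.replace.go [o] new fuel l acc =
        acc.reverse ++ l.flatMap (fun c => if c = o then new else [c]) := by
  intro fuel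
  induction fuel with
  | zero => intro l acc h; simp at h; simp [h, PySem.Chars.replace.go.eq_1]
  | succ n ih =>
    intro l acc h
    match l with
    | [] => rw [PySem.Chars.replace.go.eq_2 _ _ _ _ (by omega)]; simp
    | c :: t =>
      rw [PySem.Chars.replace.go.eq_3]
      have hpre : [o].isPrefixOf (c :: t) = (o == c) := by simp [List.isPrefixOf]
      simp only [List.length_cons] at h
      by_cases hc : c = o
      · rw [hpre, if_pos (by simp [hc])]
        rw [ih _ _ (by simpa using Nat.le_of_succ_le_succ h)]
        simp [hc]
      · rw [hpre, if_neg (by simp [Ne.symm hc])]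
        rw [ih _ _ (by omega)]
        simp [hc]

theorem pvReplaceSingle (l : List Char) (o : Char) (new : List Char) :
    PySem.Chars.replace l [o] new = l.flatMap (fun c => if c = o then new else [c]) := by
  rw [PySem.Chars.replace]
  rw [if_neg (by simp)]
  exact pvReplaceGo o new l.length l [] le_rfl

def pvESub (c : Char) : List Char :=
  if c = ',' then [' ', ',', ' '] else if c = ';' then [' ', ';', ' '] else [c]

theorem pvReplaceReplace (cs : List Char) :
    PySem.Chars.replace (PySem.Chars.replace cs [','] [' ', ',', ' ']) [';'] [' ', ';', ' '] =
      cs.flatMap pvESub := by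
  rw [pvReplaceSingle, pvReplaceSingle]
  induction cs with
  | nil => rfl
  | cons c t ih =>
  simp only [List.flatMap_cons, List.flatMap_append, ih]
  congr 1
  by_cases h1 : c = ','
  · simp [h1, pvESub]
  · by_cases h2 : c = ';'
    · simp [h2, pvESub]
    · simp [h1, h2, pvESub]

def pvTok (cs : List Char) : List (List Char) :=
  match h : cs.dropWhile PySem.Chars.isspace with
  | [] => []
  | c :: rest =>
    if c = ',' ∨ c = ';' then [c] :: pvTok rest
    else ((c :: rest).takeWhile pvWordCharA) :: pvTok ((c :: rest).dropWhile pvWordCharA)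
termination_by cs.length
decreasing_by
  all_goals have hb := pvTr2_lt h
  · rename_i hc; rwa [if_pos hc] at hb
  · rename_i hc; rw [if_neg hc] at hb; exact hb

theorem pvTokNil {cs : List Char} (h : cs.dropWhile PySem.Chars.isspace = []) :
    pvTok cs = [] := by
  rw [pvTok.eq_def, h]

theorem pvTokCons {cs : List Char} {c : Char} {rest : List Char}
    (h : cs.dropWhile PySem.Chars.isspace = c :: rest) :
    pvTok cs = if c = ',' ∨ c = ';' then [c] :: pvTok rest
      else ((c :: rest).takeWhile pvWordCharA) :: pvTok ((c :: rest).dropWhile pvWordCharA) := by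
  rw [pvTok.eq_def, h]

theorem pvGoAccOut : ∀ (cs cur : List Char) (acc : List (List Char)),
    PySem.Chars.split₀.go cs cur acc = acc.reverse ++ PySem.Chars.split₀.go cs cur [] := by
  intro cs
  induction cs with
  | nil =>
    intro cur acc
    rw [PySem.Chars.split₀.go.eq_1, PySem.Chars.split₀.go.eq_1]
    split <;> simp
  | cons c rest ih =>
    intro cur acc
    rw [PySem.Chars.split₀.go.eq_2, PySem.Chars.split₀.go.eq_2]
    by_cases hs : PySem.Chars.isspace c = true
    · rw [if_pos hs, if_pos hs]
      by_cases hc : cur.isEmpty = true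
      · rw [if_pos hc, if_pos hc, ih]
      · rw [if_neg hc, if_neg hc, ih [] (cur.reverse :: acc), ih [] [cur.reverse]]
        simp
    · rw [if_neg hs, if_neg hs, ih]

theorem pvGoSkipWs : ∀ (pre cs : List Char) (acc : List (List Char)),
    (∀ c ∈ pre, PySem.Chars.isspace c = true) →
    PySem.Chars.split₀.go (pre ++ cs) [] acc = PySem.Chars.split₀.go cs [] acc := by
  intro pre
  induction pre with
  | nil => intro cs acc _; rfl
  | cons p t ih =>
    intro cs acc hws
    rw [List.cons_append, PySem.Chars.split₀.go.eq_2, if_pos (hws p (by simp)),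
      if_pos (by simp)]
    exact ih cs acc (fun c hc => hws c (by simp [hc]))

theorem pvGoWord : ∀ (t : List Char) (l cur : List Char) (acc : List (List Char)),
    (∀ c ∈ t, PySem.Chars.isspace c = false) →
    PySem.Chars.split₀.go (t ++ l) cur acc = PySem.Chars.split₀.go l (t.reverse ++ cur) acc := by
  intro t
  induction t with
  | nil => intro l cur acc _; simp
  | cons x xs ih =>
    intro l cur acc hnw
    rw [List.cons_append, PySem.Chars.split₀.go.eq_2,
      if_neg (by simp [hnw x (by simp)]), ih l (x :: cur) acc (fun c hc => hnw c (by simp [hc]))]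
    simp

def pvExpand (cs : List Char) : List Char := cs.flatMap pvESub

theorem pvESubWs {c : Char} (h : PySem.Chars.isspace c = true) : pvESub c = [c] := by
  have h1 : ¬ c = ',' := by rintro rfl; simp [PySem.Chars.isspace] at h
  have h2 : ¬ c = ';' := by rintro rfl; simp [PySem.Chars.isspace] at h
  simp [pvESub, h1, h2]

theorem pvESubWord {c : Char} (h : pvWordCharA c = true) : pvESub c = [c] := by
  simp [pvWordCharA] at h
  simp [pvESub, h.1.2, h.2]

theorem pvExpandWs : ∀ (l : List Char), (∀ c ∈ l, PySem.Chars.isspace c = true) →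
    pvExpand l = l := by
  intro l
  induction l with
  | nil => intro _; rfl
  | cons c t ih =>
    intro h
    simp only [pvExpand, List.flatMap_cons] at ih ⊢
    rw [pvESubWs (h c (by simp)), List.singleton_append,
      ih (fun x hx => h x (by simp [hx]))]

theorem pvExpandWord : ∀ (l : List Char), (∀ c ∈ l, pvWordCharA c = true) →
    pvExpand l = l := by
  intro l
  induction l with
  | nil => intro _; rfl
  | cons c t ih =>
    intro h
    simp only [pvExpand, List.flatMap_cons] at ih ⊢
    rw [pvESubWord (h c (by simp)), List.singleton_append,
      ih (fun x hx => h x (by simp [hx]))]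

theorem pvSplitExpandAux : ∀ (n : Nat) (cs : List Char), cs.length ≤ n →
    PySem.Chars.split₀.go (pvExpand cs) [] [] = pvTok cs := by
  intro n
  induction n with
  | zero =>
    intro cs h
    have : cs = [] := by simpa using h
    subst this
    rw [pvTok.eq_def]; rfl
  | succ n ih =>
    intro cs hlen
    rcases h : cs.dropWhile PySem.Chars.isspace with _ | ⟨c, rest⟩
    · -- all whitespace
      have hws : ∀ c ∈ cs, PySem.Chars.isspace c = true := by
        simpa using (List.dropWhile_eq_nil_iff).1 h
      rw [pvExpandWs cs hws]
      have := pvGoSkipWs cs [] [] hws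
      rw [List.append_nil] at this
      rw [this, pvTok.eq_def, h]
      rfl
    · have hcons : (c :: rest).length ≤ cs.length := by
        rw [← h]; exact List.length_dropWhile_le _ _
      simp only [List.length_cons] at hcons
      have hcw : PySem.Chars.isspace c = false := pvHeadDropWhile h
      have hpre : cs.takeWhile PySem.Chars.isspace ++ (c :: rest) = cs := by
        conv_rhs => rw [← List.takeWhile_append_dropWhile (p := PySem.Chars.isspace) (l := cs)]
        rw [h]
      have hexp : pvExpand cs = pvExpand (cs.takeWhile PySem.Chars.isspace) ++ pvExpand (c :: rest) := by
        conv_lhs => rw [← hpre]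
        simp [pvExpand]
      have hpws : ∀ x ∈ cs.takeWhile PySem.Chars.isspace, PySem.Chars.isspace x = true :=
        fun x hx => List.mem_takeWhile_imp hx
      rw [hexp, pvExpandWs _ hpws, pvGoSkipWs _ _ _ hpws]
      by_cases hsep : c = ',' ∨ c = ';'
      · have hesub : pvESub c = [' ', c, ' '] := by
          rcases hsep with rfl | rfl <;> simp [pvESub]
        have hrest : rest.length ≤ n := by omega
        have hexp2 : pvExpand (c :: rest) = ' ' :: c :: ' ' :: pvExpand rest := by
          simp [pvExpand, hesub]
        rw [hexp2, PySem.Chars.split₀.go.eq_2, if_pos (by decide), if_pos (by decide),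
          PySem.Chars.split₀.go.eq_2, if_neg (by simp [hcw]),
          PySem.Chars.split₀.go.eq_2, if_pos (by decide), if_neg (by simp),
          pvGoAccOut, ih rest hrest]
        conv_rhs => rw [pvTok.eq_def, h]
        simp [hsep]
      · have hwc : pvWordCharA c = true := by
          simp [pvWordCharA, hcw]
          constructor <;> (intro hc; exact hsep (by simp [hc]))
        have htr : (c :: rest).takeWhile pvWordCharA ++ (c :: rest).dropWhile pvWordCharA
            = c :: rest := List.takeWhile_append_dropWhile
        set tok := (c :: rest).takeWhile pvWordCharA with htok
        set rest2 := (c :: rest).dropWhile pvWordCharA with hrest2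
        have htokw : ∀ x ∈ tok, pvWordCharA x = true := fun x hx => List.mem_takeWhile_imp hx
        have htoknw : ∀ x ∈ tok, PySem.Chars.isspace x = false := by
          intro x hx
          have := htokw x hx
          simp [pvWordCharA] at this
          exact this.1.1
        have htokne : tok ≠ [] := by
          rw [htok, List.takeWhile_cons, if_pos hwc]
          simp
        have hr2len : rest2.length ≤ n := by
          have : rest2 = rest.dropWhile pvWordCharA := by
            rw [hrest2, List.dropWhile_cons, if_pos hwc]
          have h2 := List.length_dropWhile_le pvWordCharA rest
          rw [this]
          omega
        have hexp2 : pvExpand (c :: rest) = tok ++ pvExpand rest2 := by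
          rw [← htr]
          simp only [pvExpand, List.flatMap_append]
          rw [← pvExpand, ← pvExpand, pvExpandWord _ htokw]
        rw [hexp2, pvGoWord tok _ [] [] htoknw, List.append_nil]
        have hgoal : PySem.Chars.split₀.go (pvExpand rest2) tok.reverse [] = tok :: pvTok rest2 := by
          rcases h2 : rest2 with _ | ⟨d, l2⟩
          · simp only [pvExpand, List.flatMap_nil]
            rw [PySem.Chars.split₀.go.eq_1]
            have he : tok.reverse.isEmpty = false := by simp [htokne]
            rw [he]
            simp [pvTok.eq_def]
          · have hd : pvWordCharA d = false := by
              have := pvHeadDropWhile (p := pvWordCharA) (l := c :: rest) (by rw [← hrest2, h2])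
              exact this
            have hihr : PySem.Chars.split₀.go (pvExpand (d :: l2)) [] [] = pvTok (d :: l2) :=
              ih (d :: l2) (h2 ▸ hr2len)
            obtain ⟨w, l', hwl, hw⟩ :
                ∃ w l', pvExpand (d :: l2) = w :: l' ∧ PySem.Chars.isspace w = true := by
              by_cases hds : d = ',' ∨ d = ';'
              · have hsub : pvESub d = [' ', d, ' '] := by
                  rcases hds with rfl | rfl <;> simp [pvESub]
                exact ⟨' ', d :: ' ' :: pvExpand l2, by simp [pvExpand, hsub], by decide⟩
              · have hdw : PySem.Chars.isspace d = true := by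
                  by_contra hno
                  have hno' : PySem.Chars.isspace d = false := by simpa using hno
                  simp [pvWordCharA, hno'] at hd
                  exact hds (or_iff_not_imp_left.2 hd)
                exact ⟨d, pvExpand l2, by simp [pvExpand, pvESubWs hdw], hdw⟩
            rw [hwl, PySem.Chars.split₀.go.eq_2, if_pos hw, if_pos (by simp)] at hihr
            rw [hwl, PySem.Chars.split₀.go.eq_2, if_pos hw, if_neg (by simp [htokne]),
              pvGoAccOut, hihr]
            simp
        rw [hgoal]
        conv_rhs => rw [pvTok.eq_def, h]
        simp [hsep, htok, hrest2]

theorem pvSplitExpand (cs : List Char) : PySem.Chars.split₀ (pvExpand cs) = pvTok cs := by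
  rw [PySem.Chars.split₀]
  exact pvSplitExpandAux cs.length cs le_rfl

theorem pvTokensEq (sql : String) :
    PySem.Str.split₀ (PySem.Str.replace (PySem.Str.replace sql "," " , ") ";" " ; ") =
      (pvTok sql.toList).map String.ofList := by
  rw [PySem.Str.split₀, PySem.Str.replace, PySem.Str.replace]
  simp only [String.toList_ofList]
  rw [show ("," : String).toList = [','] from rfl,
    show (";" : String).toList = [';'] from rfl,
    show (" , " : String).toList = [' ', ',', ' '] from rfl,
    show (" ; " : String).toList = [' ', ';', ' '] from rfl,
    pvReplaceReplace,
    show List.flatMap pvESub sql.toList = pvExpand sql.toList from rfl, pvSplitExpand]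

theorem pvUpperFiber (c : Char) (u : Char) (hu : u = 'B' ∨ u = 'Y' ∨ u = 'A' ∨ u = 'L')
    (h : PySem.Chars.upperChar c = u) : pvWordCharA c = true := by
  rw [PySem.Chars.upperChar] at h
  split at h
  · rename_i hl
    have hl2 : 97 ≤ c.toNat ∧ c.toNat ≤ 122 := by
      simpa [PySem.Chars.islower, Char.le_def] using hl
    obtain ⟨h1, h2⟩ := hl2
    have hsp : PySem.Chars.isspace c = false := by
      simp only [PySem.Chars.isspace]
      simp only [Bool.or_eq_false_iff, Bool.and_eq_false_iff, decide_eq_false_iff_not]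
      omega
    have hc1 : ¬ c = ',' := by rintro rfl; simp at h1
    have hc2 : ¬ c = ';' := by rintro rfl; simp at h1
    simp [pvWordCharA, hsp, hc1, hc2]
  · subst h
    rcases hu with rfl | rfl | rfl | rfl <;> decide

theorem pvTakeDropWhileOfTake (p : Char → Bool) :
    ∀ (k : Nat) (l : List Char), (∀ c ∈ l.take k, p c = true) →
      l.takeWhile p = l.take k ++ (l.drop k).takeWhile p ∧
      l.dropWhile p = (l.drop k).dropWhile p := by
  intro k
  induction k with
  | zero => intro l _; simp
  | succ m ih =>
    intro l h
    match l with
    | [] => simp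
    | c :: t =>
      have hc : p c = true := h c (by simp)
      have ht := ih t (fun x hx => h x (by simp [hx]))
      simp only [List.take_succ_cons, List.drop_succ_cons, List.takeWhile_cons, hc, if_pos,
        List.dropWhile_cons, List.cons_append]
      exact ⟨by rw [ht.1], by rw [ht.2]⟩

theorem pvDropWhileIdem (p : Char → Bool) (l : List Char) :
    (l.dropWhile p).dropWhile p = l.dropWhile p := by
  cases h : l.dropWhile p with
  | nil => simp
  | cons c rest =>
    rw [List.dropWhile_cons, if_neg (by simp [pvHeadDropWhile h])]

theorem pvTokDropWhile (l : List Char) :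
    pvTok (l.dropWhile PySem.Chars.isspace) = pvTok l := by
  conv_lhs => rw [pvTok.eq_def]
  conv_rhs => rw [pvTok.eq_def]
  rw [pvDropWhileIdem]

theorem pvTokAppendWs : ∀ (n : Nat) (l t : List Char), l.length ≤ n →
    (∀ c ∈ t, PySem.Chars.isspace c = true) →
    pvTok (l ++ t) = pvTok l := by
  intro n
  induction n with
  | zero =>
    intro l t hl hws
    have : l = [] := by simpa using hl
    subst this
    simp only [List.nil_append]
    rw [pvTok.eq_def, pvTok.eq_def]
    rw [List.dropWhile_eq_nil_iff.2 (by simpa using hws)]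
    rfl
  | succ n ih =>
    intro l t hl hws
    rcases h : l.dropWhile PySem.Chars.isspace with _ | ⟨c, rest⟩
    · have hlw : ∀ c ∈ l, PySem.Chars.isspace c = true := by
        simpa using List.dropWhile_eq_nil_iff.1 h
      rw [pvTok.eq_def, pvTok.eq_def, h]
      rw [List.dropWhile_eq_nil_iff.2 (by
        intro x hx
        rcases List.mem_append.1 hx with h1 | h2
        · exact hlw x h1
        · exact hws x h2)]
    · have hd : (l ++ t).dropWhile PySem.Chars.isspace = c :: (rest ++ t) := by
        rw [List.dropWhile_append]
        simp [h]
      have hlen : (c :: rest).length ≤ l.length := by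
        rw [← h]; exact List.length_dropWhile_le _ _
      simp only [List.length_cons] at hlen
      have hcw : PySem.Chars.isspace c = false := pvHeadDropWhile h
      rw [pvTokCons hd, pvTokCons h]
      by_cases hsep : c = ',' ∨ c = ';'
      · rw [if_pos hsep, if_pos hsep, ih rest t (by omega) hws]
      · rw [if_neg hsep, if_neg hsep]
        have hwc : pvWordCharA c = true := by
          simp [pvWordCharA, hcw]
          constructor <;> (intro hc; exact hsep (by simp [hc]))
        have hwsnil : ∀ (u : List Char), (∀ c ∈ u, PySem.Chars.isspace c = true) →
            u.takeWhile pvWordCharA = [] := by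
          intro u hu
          cases u with
          | nil => rfl
          | cons x xs =>
            rw [List.takeWhile_cons, if_neg (by simp [pvWordCharA, hu x (by simp)])]
        have hwstoknil : pvTok t = [] := by
          rw [pvTok.eq_def, List.dropWhile_eq_nil_iff.2 (by simpa using hws)]
        rw [← List.cons_append]
        rcases hdw : (c :: rest).dropWhile pvWordCharA with _ | ⟨d, l2⟩
        · have htk : (c :: rest).takeWhile pvWordCharA = c :: rest := by
            have h0 := List.takeWhile_append_dropWhile (p := pvWordCharA) (l := c :: rest)
            rw [hdw, List.append_nil] at h0; exact h0
          have hwsdrop : t.dropWhile pvWordCharA = t := by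
            cases t with
            | nil => rfl
            | cons x xs =>
              rw [List.dropWhile_cons, if_neg (by simp [pvWordCharA, hws x (by simp)])]
          rw [List.takeWhile_append, if_pos (by rw [htk]), List.dropWhile_append,
            if_pos (by rw [hdw]; rfl), htk, hwsnil t hws, List.append_nil, hwsdrop, hwstoknil,
            pvTokNil (show List.dropWhile PySem.Chars.isspace [] = [] from rfl)]
        · have hlt : (d :: l2).length ≤ n := by
            have h0 : (c :: rest).dropWhile pvWordCharA = rest.dropWhile pvWordCharA := by
              rw [List.dropWhile_cons, if_pos hwc]
            have h1 := List.length_dropWhile_le pvWordCharA rest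
            rw [h0] at hdw
            have h2 := congrArg List.length hdw
            simp only [List.length_cons] at h2 ⊢
            omega
          have hlensum := congrArg List.length
            (List.takeWhile_append_dropWhile (p := pvWordCharA) (l := c :: rest))
          simp only [List.length_append, List.length_cons] at hlensum
          rw [List.takeWhile_append, if_neg (by
              rw [hdw] at hlensum
              simp only [List.length_cons] at hlensum ⊢
              omega),
            List.dropWhile_append, if_neg (by rw [hdw]; simp), hdw,
            ih (d :: l2) t hlt hws]

theorem pvTokStrip (s : String) : pvTok (PySem.Str.strip s).toList = pvTok s.toList := by
  rw [PySem.Str.strip, String.toList_ofList, PySem.Chars.strip, PySem.Chars.lstrip,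
    PySem.Chars.rstrip]
  set cs := s.toList with hcs
  set m := cs.dropWhile PySem.Chars.isspace with hm
  have hsplit : ((m.reverse.takeWhile PySem.Chars.isspace) ++
      (m.reverse.dropWhile PySem.Chars.isspace)).reverse = m := by
    rw [List.takeWhile_append_dropWhile, List.reverse_reverse]
  rw [show pvTok cs = pvTok m from (pvTokDropWhile cs).symm]
  conv_rhs => rw [← hsplit]
  rw [List.reverse_append]
  rw [pvTokAppendWs ((m.reverse.dropWhile PySem.Chars.isspace).reverse).length _ _ le_rfl
    (by
      intro x hx
      exact List.mem_takeWhile_imp (by simpa using hx))]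

-- string-level bridges
theorem pvOfListEqIff (l : List Char) (t : String) : String.ofList l = t ↔ l = t.toList := by
  constructor
  · intro h; rw [← h, String.toList_ofList]
  · intro h; rw [h, String.ofList_toList]

theorem pvStrUpperOfList (l : List Char) (t : String) :
    PySem.Str.upper (String.ofList l) = t ↔ PySem.Chars.upper l = t.toList := by
  rw [PySem.Str.upper, String.toList_ofList, pvOfListEqIff]

theorem pvStrOfListNeSep (tok : List Char) (htokw : ∀ x ∈ tok, pvWordCharA x = true) :
    ¬ String.ofList tok = "," ∧ ¬ String.ofList tok = ";" := by
  constructor <;>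
  · rw [pvOfListEqIff]
    intro he
    first
      | (have h1 := htokw ',' (by rw [he]; decide); simp [pvWordCharA] at h1)
      | (have h1 := htokw ';' (by rw [he]; decide); simp [pvWordCharA] at h1)

-- every character of a matched B/Y/A/L slice is a word character
theorem pvTakeAllWord (after W : List Char) (k : Nat)
    (hW : ∀ u ∈ W, u = 'B' ∨ u = 'Y' ∨ u = 'A' ∨ u = 'L')
    (hcond : PySem.Chars.upper (after.take k) = W) :
    ∀ c ∈ after.take k, pvWordCharA c = true := by
  intro c hc
  have hm : PySem.Chars.upperChar c ∈ W := by
    rw [← hcond, PySem.Chars.upper]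
    exact List.mem_map_of_mem hc
  exact pvUpperFiber c _ (hW _ hm) rfl

theorem pvWBY : ∀ u ∈ (['B', 'Y'] : List Char), u = 'B' ∨ u = 'Y' ∨ u = 'A' ∨ u = 'L' := by
  intro u hu
  simp only [List.mem_cons, List.not_mem_nil, or_false] at hu
  rcases hu with rfl | rfl
  · exact Or.inl rfl
  · exact Or.inr (Or.inl rfl)

theorem pvWALL : ∀ u ∈ (['A', 'L', 'L'] : List Char), u = 'B' ∨ u = 'Y' ∨ u = 'A' ∨ u = 'L' := by
  intro u hu
  simp only [List.mem_cons, List.not_mem_nil, or_false] at hu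
  rcases hu with rfl | rfl | rfl
  · exact Or.inr (Or.inr (Or.inl rfl))
  · exact Or.inr (Or.inr (Or.inr rfl))
  · exact Or.inr (Or.inr (Or.inr rfl))

-- basic facts about takeWhile/dropWhile heads
theorem pvTWnil {l : List Char} (h : l.takeWhile pvWordCharA = []) :
    l.dropWhile pvWordCharA = l := by
  cases l with
  | nil => rfl
  | cons c t =>
    rw [List.takeWhile_cons] at h
    by_cases hc : pvWordCharA c = true
    · rw [if_pos hc] at h; simp at h
    · rw [List.dropWhile_cons, if_neg hc]

theorem pvTWDropWhile (l : List Char) :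
    ((l.dropWhile pvWordCharA).takeWhile pvWordCharA) = [] := by
  cases h : l.dropWhile pvWordCharA with
  | nil => rfl
  | cons c t => rw [List.takeWhile_cons, if_neg (by simp [pvHeadDropWhile h])]

theorem pvDropWhileEqDrop (p : Char → Bool) (l : List Char) :
    l.dropWhile p = l.drop ((l.takeWhile p).length) := by
  induction l with
  | nil => rfl
  | cons c t ih =>
    by_cases hc : p c = true
    · simp [List.dropWhile_cons, List.takeWhile_cons, hc, ih]
    · simp [List.dropWhile_cons, List.takeWhile_cons, hc]

-- D_ is closed under passing to suffixes that start at a token boundary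
theorem pvCondSuffixRel (l : List Char) (m : Nat)
    (hm : (l.drop m).takeWhile pvWordCharA = [] ∨ m = 0 ∨
      (l.drop (m - 1)).takeWhile pvWordCharA = [])
    (hc : ¬ pvDiffCond l) : ¬ pvDiffCond (l.drop m) := by
  rintro ⟨j, hj, hstart, kw, hkw, htok, hby, hlft⟩
  apply hc
  have hdd : (l.drop m).drop j = l.drop (m + j) := List.drop_drop
  rw [hdd] at htok
  have htokne : (l.drop (m + j)).takeWhile pvWordCharA ≠ [] := by
    intro h0
    rw [h0] at htok
    simp only [pvPats, List.mem_cons, List.not_mem_nil, or_false] at hkw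
    rcases hkw with rfl | rfl | rfl <;> simp [PySem.Chars.upper] at htok
  have hne : l.drop (m + j) ≠ [] := by
    intro h0; exact htokne (by rw [h0]; rfl)
  have hlt : m + j < l.length := by
    by_contra hge
    exact hne (List.drop_eq_nil_iff.2 (by omega))
  refine ⟨m + j, hlt, ?_, kw, hkw, ?_, ?_, ?_⟩
  · by_cases hj0 : j = 0
    · subst hj0
      rcases hm with hh | hh | hh
      · exact absurd (by simpa using hh) htokne
      · left; omega
      · right; simpa using hh
    · right
      rcases hstart with h2 | h2
      · exact absurd h2 hj0
      · have he : (l.drop m).drop (j - 1) = l.drop (m + j - 1) := by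
          rw [List.drop_drop]
          congr 1
          omega
        rwa [he] at h2
  · exact htok
  · rwa [show pvAfter l (m + j) = pvAfter (l.drop m) j from by rw [pvAfter, pvAfter, hdd]]
  · rwa [show pvAfter l (m + j) = pvAfter (l.drop m) j from by rw [pvAfter, pvAfter, hdd]]

-- at a token boundary of cs (first non-space position), the start condition of pvHitAt holds
theorem pvStartAt {cs : List Char} {c : Char} {rest : List Char}
    (h : cs.dropWhile PySem.Chars.isspace = c :: rest) :
    (cs.takeWhile PySem.Chars.isspace).length = 0 ∨
    (cs.drop ((cs.takeWhile PySem.Chars.isspace).length - 1)).takeWhile pvWordCharA = [] := by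
  set ws := cs.takeWhile PySem.Chars.isspace with hws
  rcases Nat.eq_zero_or_pos ws.length with h0 | hpos
  · exact Or.inl h0
  right
  have hcs : ws ++ (c :: rest) = cs := by
    rw [hws, ← h]; exact List.takeWhile_append_dropWhile
  have hdrop : cs.drop (ws.length - 1) = ws.drop (ws.length - 1) ++ (c :: rest) := by
    rw [← hcs, List.drop_append_of_le_length (by omega)]
  have hlen1 : (ws.drop (ws.length - 1)).length = 1 := by
    simp only [List.length_drop]; omega
  cases hd : ws.drop (ws.length - 1) with
  | nil => rw [hd] at hlen1; simp at hlen1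
  | cons d t =>
    have hdm : d ∈ ws := by
      have : d ∈ ws.drop (ws.length - 1) := by rw [hd]; exact List.mem_cons_self
      exact List.drop_subset _ _ this
    have hsp : PySem.Chars.isspace d = true := List.mem_takeWhile_imp hdm
    rw [hdrop, hd]
    simp [List.takeWhile_cons, pvWordCharA, hsp]

-- one-step unfolding of pvBLoop on a non-empty token list (proof-side restatement only)
theorem pvBLoopCons (t : String) (stk lines current : List String) :
    pvBLoop (t :: stk) lines current =
      (if t = "," then
        pvBLoop stk (if current = [] then lines else lines ++ [PySem.Str.join " " current]) [","]
      else if t = ";" then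
        pvBLoop stk ((if current = [] then lines
          else lines ++ [PySem.Str.join " " current]) ++ [";"]) []
      else if PySem.Str.upper t ∈ pvKwsB ∨ PySem.Str.startswith t "--" = true then
        (if stk = [] then pvBLoop []
            (if current = [] then lines else lines ++ [PySem.Str.join " " current]) [t]
         else
          if PySem.Str.upper t = "GROUP" ∨ PySem.Str.upper t = "ORDER" ∨
              PySem.Str.upper t = "UNION" then
            if PySem.Str.upper stk.headI =
                (if PySem.Str.upper t = "UNION" then "ALL" else "BY") then
              pvBLoop stk.tail
                (if current = [] then lines else lines ++ [PySem.Str.join " " current])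
                [PySem.Str.upper t ++ " " ++ (if PySem.Str.upper t = "UNION" then "ALL" else "BY")]
            else pvBLoop stk
              (if current = [] then lines else lines ++ [PySem.Str.join " " current]) [t]
          else pvBLoop stk
            (if current = [] then lines else lines ++ [PySem.Str.join " " current]) [t])
      else pvBLoop stk lines (current ++ [t])) := by
  cases stk with
  | nil => rw [pvBLoop.eq_def]; rfl
  | cons a b => rw [pvBLoop.eq_def]; rfl

-- MAIN LOOP LEMMA: outside the change region, A's character scanner equals B's token loop
set_option maxRecDepth 8192 in
theorem pvLoopEq : ∀ (n : Nat) (cs : List Char) (lines current : List String),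
    cs.length ≤ n → ¬ pvDiffCond cs →
    pvALoop cs lines current = pvBLoop ((pvTok cs).map String.ofList) lines current := by
  intro n
  induction n with
  | zero =>
    intro cs lines current h _
    have hcs : cs = [] := by simpa using h
    subst hcs
    rw [pvTokNil rfl, pvALoop.eq_def, pvBLoop.eq_def]
    rfl
  | succ n ih =>
    intro cs lines current hlen hDC
    rcases h : cs.dropWhile PySem.Chars.isspace with _ | ⟨c, rest⟩
    · rw [pvTokNil h, pvALoop.eq_def, h, pvBLoop.eq_def]
      rfl
    · have hlencons : (c :: rest).length ≤ cs.length := by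
        rw [← h]; exact List.length_dropWhile_le _ _
      simp only [List.length_cons] at hlencons
      have hrest_le : rest.length ≤ n := by omega
      have hcw : PySem.Chars.isspace c = false := pvHeadDropWhile h
      -- positional facts for the first token
      have hcs2 : cs.takeWhile PySem.Chars.isspace ++ (c :: rest) = cs := by
        rw [← h]; exact List.takeWhile_append_dropWhile
      have hdropw : cs.drop ((cs.takeWhile PySem.Chars.isspace).length) = c :: rest := by
        rw [← pvDropWhileEqDrop]; exact h
      have hwlt : (cs.takeWhile PySem.Chars.isspace).length < cs.length := by
        have := congrArg List.length hcs2
        simp only [List.length_append, List.length_cons] at this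
        omega
      rw [pvALoop.eq_def, h, pvTok.eq_def, h]
      by_cases hsep : c = ',' ∨ c = ';'
      · -- separator token: not a word char, so no pvHitAt site is consumed
        have hDCrest : ¬ pvDiffCond rest := by
          have hrw : rest = cs.drop ((cs.takeWhile PySem.Chars.isspace).length + 1) := by
            conv_lhs => rw [show rest = (c :: rest).drop 1 from rfl, ← hdropw]
            rw [List.drop_drop]
          rw [hrw]
          refine pvCondSuffixRel cs _ (Or.inr (Or.inr ?_)) hDC
          rw [Nat.add_sub_cancel, hdropw]
          have : pvWordCharA c = false := by
            rcases hsep with rfl | rfl <;> decide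
          simp [List.takeWhile_cons, this]
        simp only [if_pos hsep, List.map_cons]
        rw [pvBLoopCons]
        rcases hsep with rfl | rfl
        · rw [show String.ofList [','] = "," from rfl]
          by_cases hcur : current = []
          · rw [if_neg (by simp [hcur]), if_neg (by decide), if_neg (by decide),
              if_pos rfl, if_pos hcur]
            simp only [hcur, List.nil_append]
            exact ih rest lines [","] hrest_le hDCrest
          · rw [if_pos ⟨rfl, hcur⟩, if_pos rfl, if_neg hcur]
            exact ih rest (lines ++ [PySem.Str.join " " current]) [","] hrest_le hDCrest
        · rw [show String.ofList [';'] = ";" from rfl]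
          rw [if_neg (show ¬((";" : String) = "," ∧ current ≠ []) from by simp),
            if_pos (show (";" : String) = ";" from rfl),
            if_neg (show ¬((";" : String) = ",") from by decide),
            if_pos (show (";" : String) = ";" from rfl)]
          exact ih rest ((if current = [] then lines
            else lines ++ [PySem.Str.join " " current]) ++ [";"]) [] hrest_le hDCrest
      · -- word token
        have hwc : pvWordCharA c = true := by
          simp [pvWordCharA, hcw]
          constructor <;> (intro hc; exact hsep (by simp [hc]))
        -- no merge-with-leftover site at this token
        have hnm : ¬ (∃ kw ∈ pvPats,
            PySem.Chars.upper ((c :: rest).takeWhile pvWordCharA) = kw.1.toList ∧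
            PySem.Chars.upper ((((c :: rest).dropWhile pvWordCharA).dropWhile
              PySem.Chars.isspace).take kw.2.1) = kw.2.2.toList ∧
            ((((c :: rest).dropWhile pvWordCharA).dropWhile
              PySem.Chars.isspace).drop kw.2.1).takeWhile pvWordCharA ≠ []) := by
          intro hmrg
          apply hDC
          refine ⟨(cs.takeWhile PySem.Chars.isspace).length, hwlt, pvStartAt h, ?_⟩
          rw [show pvAfter cs ((cs.takeWhile PySem.Chars.isspace).length) =
              ((c :: rest).dropWhile pvWordCharA).dropWhile PySem.Chars.isspace from by
            rw [pvAfter, hdropw], hdropw]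
          exact hmrg
        -- the remainder after this token is a boundary suffix
        have hDCdropw : ¬ pvDiffCond (c :: rest) := by
          rw [← hdropw]
          exact pvCondSuffixRel cs _ (Or.inr (pvStartAt h)) hDC
        have hDCrest2 : ¬ pvDiffCond ((c :: rest).dropWhile pvWordCharA) := by
          rw [pvDropWhileEqDrop]
          refine pvCondSuffixRel (c :: rest) _ (Or.inl ?_) hDCdropw
          rw [← pvDropWhileEqDrop]
          exact pvTWDropWhile _
        simp only [if_neg hsep, List.map_cons]
        rw [pvBLoopCons]
        have htokw : ∀ x ∈ (c :: rest).takeWhile pvWordCharA, pvWordCharA x = true :=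
          fun x hx => List.mem_takeWhile_imp hx
        have hr2_le : ((c :: rest).dropWhile pvWordCharA).length ≤ n := by
          rw [List.dropWhile_cons, if_pos hwc]
          have := List.length_dropWhile_le pvWordCharA rest
          omega
        obtain ⟨hs1, hs2⟩ := pvStrOfListNeSep _ htokw
        rw [show pvKwsB = pvKwsA from rfl]
        rw [if_neg (show ¬(String.ofList ((c :: rest).takeWhile pvWordCharA) = "," ∧
            current ≠ []) from fun hc => hs1 hc.1),
          if_neg hs2, if_neg hs1, if_neg hs2]
        by_cases hkw : PySem.Str.upper (String.ofList ((c :: rest).takeWhile pvWordCharA)) ∈ pvKwsA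
            ∨ PySem.Str.startswith (String.ofList ((c :: rest).takeWhile pvWordCharA)) "--" = true
        · rw [if_pos hkw, if_pos hkw]
          rcases h3 : (List.dropWhile pvWordCharA (c :: rest)).dropWhile PySem.Chars.isspace
            with _ | ⟨d, tl⟩
          · -- nothing after the keyword: neither side merges
            rw [if_neg (fun hc => hc.2.2 rfl),
              ih (List.dropWhile pvWordCharA (c :: rest)) _ _ hr2_le hDCrest2, pvTokNil h3,
              List.map_nil, if_pos rfl]
          · have hne2 : List.dropWhile pvWordCharA (c :: rest) ≠ [] := by
              intro he; rw [he] at h3; simp at h3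
            have hd_notws : PySem.Chars.isspace d = false := pvHeadDropWhile h3
            have hdtl_le : (d :: tl).length ≤ (List.dropWhile pvWordCharA (c :: rest)).length := by
              rw [← h3]; exact List.length_dropWhile_le _ _
            simp only [List.length_cons] at hdtl_le
            have hDCafter : ¬ pvDiffCond (d :: tl) := by
              rw [← h3, pvDropWhileEqDrop]
              exact pvCondSuffixRel _ _ (Or.inr (pvStartAt h3)) hDCrest2
            rw [ih (List.dropWhile pvWordCharA (c :: rest)) _ _ hr2_le hDCrest2]
            by_cases hdsep : d = ',' ∨ d = ';'
            · -- next token is ',' or ';': no merge happens on either side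
              have hTok : pvTok (List.dropWhile pvWordCharA (c :: rest)) = [d] :: pvTok tl := by
                rw [pvTokCons h3, if_pos hdsep]
              rw [hTok]
              simp only [List.map_cons, List.headI_cons, List.tail_cons]
              rw [if_neg (show ¬(String.ofList [d] :: List.map String.ofList (pvTok tl) = [])
                from by simp)]
              have hnword : pvWordCharA d = false := by
                rcases hdsep with rfl | rfl <;> decide
              have hcondA2 : ¬ PySem.Chars.upper ((d :: tl).take 2) = ['B', 'Y'] := by
                intro hcd
                have hdm := pvTakeAllWord (d :: tl) ['B', 'Y'] 2 pvWBY hcd d (by simp)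
                rw [hnword] at hdm; exact absurd hdm (by simp)
              have hcondA3 : ¬ PySem.Chars.upper ((d :: tl).take 3) = ['A', 'L', 'L'] := by
                intro hcd
                have hdm := pvTakeAllWord (d :: tl) ['A', 'L', 'L'] 3 pvWALL hcd d (by simp)
                rw [hnword] at hdm; exact absurd hdm (by simp)
              by_cases hGOU : PySem.Str.upper (String.ofList
                  ((c :: rest).takeWhile pvWordCharA)) = "GROUP" ∨
                  PySem.Str.upper (String.ofList ((c :: rest).takeWhile pvWordCharA)) = "ORDER" ∨
                  PySem.Str.upper (String.ofList ((c :: rest).takeWhile pvWordCharA)) = "UNION"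
              · rw [if_pos ⟨hGOU, hne2, by simp⟩,
                  if_neg (fun hc => hcondA2 hc.2), if_neg (fun hc => hcondA2 hc.2),
                  if_neg (fun hc => hcondA3 hc.2), if_pos hGOU]
                have hBfalse : ¬ PySem.Str.upper (String.ofList [d]) =
                    (if PySem.Str.upper (String.ofList
                      ((c :: rest).takeWhile pvWordCharA)) = "UNION" then ("ALL" : String) else "BY") := by
                  by_cases hu : PySem.Str.upper (String.ofList
                      ((c :: rest).takeWhile pvWordCharA)) = "UNION"
                  · rw [if_pos hu, pvStrUpperOfList]
                    intro hcd
                    have hl := congrArg List.length hcd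
                    simp [PySem.Chars.upper] at hl
                  · rw [if_neg hu, pvStrUpperOfList]
                    intro hcd
                    have hl := congrArg List.length hcd
                    simp [PySem.Chars.upper] at hl
                rw [if_neg hBfalse]
              · rw [if_neg (fun hc => hGOU hc.1), if_neg hGOU]
            · -- next token is a word token
              have hdw : pvWordCharA d = true := by
                simp [pvWordCharA, hd_notws]
                constructor <;> (intro hc; exact hdsep (by simp [hc]))
              have hTok : pvTok (List.dropWhile pvWordCharA (c :: rest)) =
                  ((d :: tl).takeWhile pvWordCharA) ::
                    pvTok ((d :: tl).dropWhile pvWordCharA) := by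
                rw [pvTokCons h3, if_neg hdsep]
              rw [hTok]
              simp only [List.map_cons, List.headI_cons, List.tail_cons]
              rw [if_neg (show ¬(String.ofList ((d :: tl).takeWhile pvWordCharA) ::
                  List.map String.ofList (pvTok ((d :: tl).dropWhile pvWordCharA)) = [])
                from by simp)]
              by_cases hGOU : PySem.Str.upper (String.ofList
                  ((c :: rest).takeWhile pvWordCharA)) = "GROUP" ∨
                  PySem.Str.upper (String.ofList ((c :: rest).takeWhile pvWordCharA)) = "ORDER" ∨
                  PySem.Str.upper (String.ofList ((c :: rest).takeWhile pvWordCharA)) = "UNION"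
              · rcases hGOU with hcase | hcase | hcase <;> rw [hcase]
                · -- GROUP: look for BY
                  rw [show (if ("GROUP" : String) = "UNION" then ("ALL" : String) else "BY") = "BY"
                      from by decide]
                  by_cases hcond : PySem.Chars.upper ((d :: tl).take 2) = ['B', 'Y']
                  · -- merge on both sides: next token is exactly BY
                    have htwnil : ((d :: tl).drop 2).takeWhile pvWordCharA = [] := by
                      by_contra hX
                      refine hnm ⟨("GROUP", 2, "BY"), by simp [pvPats], ?_, ?_, ?_⟩
                      · exact (pvStrUpperOfList _ _).1 hcase
                      · rw [h3]; exact hcond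
                      · rw [h3]; exact hX
                    have hall := pvTakeAllWord (d :: tl) ['B', 'Y'] 2 pvWBY hcond
                    obtain ⟨htw0, hdw0⟩ := pvTakeDropWhileOfTake pvWordCharA 2 (d :: tl) hall
                    have hdwid := pvTWnil htwnil
                    have htw : (d :: tl).takeWhile pvWordCharA = (d :: tl).take 2 := by
                      rw [htw0, htwnil, List.append_nil]
                    have hdw2 : (d :: tl).dropWhile pvWordCharA = (d :: tl).drop 2 := by
                      rw [hdw0, hdwid]
                    have hBcond : PySem.Str.upper
                        (String.ofList ((d :: tl).takeWhile pvWordCharA)) = "BY" := by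
                      rw [pvStrUpperOfList, htw, hcond]
                      rfl
                    rw [if_pos ⟨Or.inl rfl, hne2, by simp [h3]⟩, if_pos ⟨rfl, hcond⟩,
                      if_pos hBcond,
                      show ("GROUP" ++ " " ++ "BY" : String) = "GROUP BY" from by decide]
                    have had_le : ((d :: tl).drop 2).length ≤ n := by
                      have h10 : ((d :: tl).drop 2).length = tl.length + 1 - 2 := by simp
                      omega
                    have hDCad : ¬ pvDiffCond ((d :: tl).drop 2) :=
                      pvCondSuffixRel _ _ (Or.inl htwnil) hDCafter
                    rw [ih ((d :: tl).drop 2) _ _ had_le hDCad]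
                    congr 2
                    rw [hdw2]
                  · -- no merge on either side
                    have hBneg : ¬ PySem.Str.upper
                        (String.ofList ((d :: tl).takeWhile pvWordCharA)) = "BY" := by
                      intro hX
                      have hXc := (pvStrUpperOfList _ _).1 hX
                      rw [show ("BY" : String).toList = ['B','Y'] from rfl] at hXc
                      have hlen2 : ((d :: tl).takeWhile pvWordCharA).length = 2 := by
                        have := congrArg List.length hXc
                        simpa [PySem.Chars.upper] using this
                      have hpref : (d :: tl).takeWhile pvWordCharA =
                          (d :: tl).take (((d :: tl).takeWhile pvWordCharA).length) :=
                        List.prefix_iff_eq_take.1 (List.takeWhile_prefix _)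
                      rw [hlen2] at hpref
                      rw [← hpref] at hcond
                      exact hcond hXc
                    rw [if_pos ⟨Or.inl rfl, hne2, by simp [h3]⟩, if_neg (fun hc => hcond hc.2),
                      if_neg (fun hc => absurd hc.1 (by decide)),
                      if_neg (fun hc => absurd hc.1 (by decide)),
                      if_pos (Or.inl rfl), if_neg hBneg]
                · -- ORDER: look for BY
                  rw [show (if ("ORDER" : String) = "UNION" then ("ALL" : String) else "BY") = "BY"
                      from by decide]
                  by_cases hcond : PySem.Chars.upper ((d :: tl).take 2) = ['B', 'Y']
                  · have htwnil : ((d :: tl).drop 2).takeWhile pvWordCharA = [] := by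
                      by_contra hX
                      refine hnm ⟨("ORDER", 2, "BY"), by simp [pvPats], ?_, ?_, ?_⟩
                      · exact (pvStrUpperOfList _ _).1 hcase
                      · rw [h3]; exact hcond
                      · rw [h3]; exact hX
                    have hall := pvTakeAllWord (d :: tl) ['B', 'Y'] 2 pvWBY hcond
                    obtain ⟨htw0, hdw0⟩ := pvTakeDropWhileOfTake pvWordCharA 2 (d :: tl) hall
                    have hdwid := pvTWnil htwnil
                    have htw : (d :: tl).takeWhile pvWordCharA = (d :: tl).take 2 := by
                      rw [htw0, htwnil, List.append_nil]
                    have hdw2 : (d :: tl).dropWhile pvWordCharA = (d :: tl).drop 2 := by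
                      rw [hdw0, hdwid]
                    have hBcond : PySem.Str.upper
                        (String.ofList ((d :: tl).takeWhile pvWordCharA)) = "BY" := by
                      rw [pvStrUpperOfList, htw, hcond]
                      rfl
                    rw [if_pos ⟨Or.inr (Or.inl rfl), hne2, by simp [h3]⟩,
                      if_neg (fun hc => absurd hc.1 (by decide)), if_pos ⟨rfl, hcond⟩,
                      if_pos hBcond,
                      show ("ORDER" ++ " " ++ "BY" : String) = "ORDER BY" from by decide]
                    have had_le : ((d :: tl).drop 2).length ≤ n := by
                      have h10 : ((d :: tl).drop 2).length = tl.length + 1 - 2 := by simp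
                      omega
                    have hDCad : ¬ pvDiffCond ((d :: tl).drop 2) :=
                      pvCondSuffixRel _ _ (Or.inl htwnil) hDCafter
                    rw [ih ((d :: tl).drop 2) _ _ had_le hDCad]
                    congr 2
                    rw [hdw2]
                  · have hBneg : ¬ PySem.Str.upper
                        (String.ofList ((d :: tl).takeWhile pvWordCharA)) = "BY" := by
                      intro hX
                      have hXc := (pvStrUpperOfList _ _).1 hX
                      rw [show ("BY" : String).toList = ['B','Y'] from rfl] at hXc
                      have hlen2 : ((d :: tl).takeWhile pvWordCharA).length = 2 := by
                        have := congrArg List.length hXc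
                        simpa [PySem.Chars.upper] using this
                      have hpref : (d :: tl).takeWhile pvWordCharA =
                          (d :: tl).take (((d :: tl).takeWhile pvWordCharA).length) :=
                        List.prefix_iff_eq_take.1 (List.takeWhile_prefix _)
                      rw [hlen2] at hpref
                      rw [← hpref] at hcond
                      exact hcond hXc
                    rw [if_pos ⟨Or.inr (Or.inl rfl), hne2, by simp [h3]⟩,
                      if_neg (fun hc => absurd hc.1 (by decide)),
                      if_neg (fun hc => hcond hc.2),
                      if_neg (fun hc => absurd hc.1 (by decide)),
                      if_pos (Or.inr (Or.inl rfl)), if_neg hBneg]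
                · -- UNION: look for ALL
                  rw [show (if ("UNION" : String) = "UNION" then ("ALL" : String) else "BY") = "ALL"
                      from by decide]
                  by_cases hcond : PySem.Chars.upper ((d :: tl).take 3) = ['A', 'L', 'L']
                  · have htwnil : ((d :: tl).drop 3).takeWhile pvWordCharA = [] := by
                      by_contra hX
                      refine hnm ⟨("UNION", 3, "ALL"), by simp [pvPats], ?_, ?_, ?_⟩
                      · exact (pvStrUpperOfList _ _).1 hcase
                      · rw [h3]; exact hcond
                      · rw [h3]; exact hX
                    have hall := pvTakeAllWord (d :: tl) ['A', 'L', 'L'] 3 pvWALL hcond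
                    obtain ⟨htw0, hdw0⟩ := pvTakeDropWhileOfTake pvWordCharA 3 (d :: tl) hall
                    have hdwid := pvTWnil htwnil
                    have htw : (d :: tl).takeWhile pvWordCharA = (d :: tl).take 3 := by
                      rw [htw0, htwnil, List.append_nil]
                    have hdw2 : (d :: tl).dropWhile pvWordCharA = (d :: tl).drop 3 := by
                      rw [hdw0, hdwid]
                    have hBcond : PySem.Str.upper
                        (String.ofList ((d :: tl).takeWhile pvWordCharA)) = "ALL" := by
                      rw [pvStrUpperOfList, htw, hcond]
                      rfl
                    rw [if_pos ⟨Or.inr (Or.inr rfl), hne2, by simp [h3]⟩,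
                      if_neg (fun hc => absurd hc.1 (by decide)),
                      if_neg (fun hc => absurd hc.1 (by decide)), if_pos ⟨rfl, hcond⟩,
                      if_pos hBcond,
                      show ("UNION" ++ " " ++ "ALL" : String) = "UNION ALL" from by decide]
                    have had_le : ((d :: tl).drop 3).length ≤ n := by
                      have h10 : ((d :: tl).drop 3).length = tl.length + 1 - 3 := by simp
                      omega
                    have hDCad : ¬ pvDiffCond ((d :: tl).drop 3) :=
                      pvCondSuffixRel _ _ (Or.inl htwnil) hDCafter
                    rw [ih ((d :: tl).drop 3) _ _ had_le hDCad]
                    congr 2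
                    rw [hdw2]
                  · have hBneg : ¬ PySem.Str.upper
                        (String.ofList ((d :: tl).takeWhile pvWordCharA)) = "ALL" := by
                      intro hX
                      have hXc := (pvStrUpperOfList _ _).1 hX
                      rw [show ("ALL" : String).toList = ['A','L','L'] from rfl] at hXc
                      have hlen2 : ((d :: tl).takeWhile pvWordCharA).length = 3 := by
                        have := congrArg List.length hXc
                        simpa [PySem.Chars.upper] using this
                      have hpref : (d :: tl).takeWhile pvWordCharA =
                          (d :: tl).take (((d :: tl).takeWhile pvWordCharA).length) :=
                        List.prefix_iff_eq_take.1 (List.takeWhile_prefix _)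
                      rw [hlen2] at hpref
                      rw [← hpref] at hcond
                      exact hcond hXc
                    rw [if_pos ⟨Or.inr (Or.inr rfl), hne2, by simp [h3]⟩,
                      if_neg (fun hc => absurd hc.1 (by decide)),
                      if_neg (fun hc => absurd hc.1 (by decide)),
                      if_neg (fun hc => hcond hc.2),
                      if_pos (Or.inr (Or.inr rfl)), if_neg hBneg]
              · rw [if_neg (fun hc => hGOU hc.1), if_neg hGOU]
        · rw [if_neg hkw, if_neg hkw]
          exact ih _ lines (current ++ [String.ofList ((c :: rest).takeWhile pvWordCharA)])
            hr2_le hDCrest2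


-- ===== output-weight apparatus for the tightness theorem =====
-- weight of an output: every line contributes its length plus one; since every line is a
-- ' '-join of its tokens, the weight is the sum over all emitted tokens of (length + 1)
def pvG (l : List String) : Nat := (l.map (fun s => s.toList.length + 1)).sum

def pvGC (l : List (List Char)) : Nat := (l.map (fun t => t.length + 1)).sum

theorem pvG_nil : pvG [] = 0 := rfl

theorem pvG_append (l : List String) (s : String) :
    pvG (l ++ [s]) = pvG l + (s.toList.length + 1) := by
  simp [pvG]

theorem pvG_cons (s : String) (l : List String) :
    pvG (s :: l) = (s.toList.length + 1) + pvG l := by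
  simp [pvG]

theorem pvGC_cons (t : List (List Char)) (x : List Char) :
    pvGC (x :: t) = (x.length + 1) + pvGC t := by
  simp [pvGC]

theorem pvG_map_ofList (t : List (List Char)) : pvG (t.map String.ofList) = pvGC t := by
  induction t with
  | nil => rfl
  | cons x r ih => rw [List.map_cons, pvG_cons, pvGC_cons, ih, String.toList_ofList]

theorem pvJoinG : ∀ (cur : List String), cur ≠ [] →
    (PySem.Str.join " " cur).toList.length + 1 = pvG cur := by
  intro cur
  induction cur with
  | nil => intro h; exact absurd rfl h
  | cons s t ih =>
    intro _
    cases t with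
    | nil =>
      rw [PySem.Str.toList_join, List.map_cons, List.map_nil, PySem.Chars.join_singleton]
      simp [pvG]
    | cons q r =>
      have ihh := ih (by simp)
      rw [PySem.Str.toList_join, List.map_cons, List.map_cons, PySem.Chars.join_cons_cons]
      rw [PySem.Str.toList_join, List.map_cons] at ihh
      rw [pvG_cons]
      simp only [List.length_append]
      have h1 : (" " : String).toList.length = 1 := rfl
      omega

-- the B loop's output weight is exactly the token weight: merging two tokens with a space
-- between them preserves the weight
theorem pvUpperLen (t : String) : (PySem.Str.upper t).toList.length = t.toList.length := by
  rw [PySem.Str.upper, String.toList_ofList, PySem.Chars.upper, List.length_map]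

theorem pvGLines' (lines cur : List String) :
    pvG (if cur = [] then lines else lines ++ [PySem.Str.join " " cur]) = pvG lines + pvG cur := by
  by_cases hcur : cur = []
  · simp [hcur, pvG]
  · rw [if_neg hcur, pvG_append, pvJoinG cur hcur]

theorem pvG_single (s : String) : pvG [s] = s.toList.length + 1 := rfl

theorem pvBG : ∀ (n : Nat) (toks : List String), toks.length ≤ n → ∀ (lines cur : List String),
    pvG (pvBLoop toks lines cur) = pvG lines + pvG cur + pvG toks := by
  have hsp1 : (" " : String).toList.length = 1 := rfl
  intro n
  induction n with
  | zero =>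
    intro toks h lines cur
    have : toks = [] := by simpa using h
    subst this
    have hnil : pvBLoop [] lines cur =
        lines ++ (if cur = [] then [] else [PySem.Str.join " " cur]) := by
      rw [pvBLoop.eq_def]
    rw [hnil, pvG_nil]
    by_cases hcur : cur = []
    · rw [if_pos hcur, List.append_nil, hcur, pvG_nil]
      omega
    · rw [if_neg hcur, pvG_append, pvJoinG cur hcur]
      omega
  | succ n ih =>
    intro toks hlen lines cur
    match toks with
    | [] =>
      have hnil : pvBLoop [] lines cur =
          lines ++ (if cur = [] then [] else [PySem.Str.join " " cur]) := by
        rw [pvBLoop.eq_def]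
      rw [hnil, pvG_nil]
      by_cases hcur : cur = []
      · rw [if_pos hcur, List.append_nil, hcur, pvG_nil]
        omega
      · rw [if_neg hcur, pvG_append, pvJoinG cur hcur]
        omega
    | t :: stk =>
      simp only [List.length_cons] at hlen
      have hstk : stk.length ≤ n := by omega
      rw [pvBLoopCons, pvG_cons]
      by_cases h1 : t = ","
      · rw [if_pos h1, ih stk hstk, pvGLines', h1]
        rw [show pvG [","] = 2 from rfl, show (("," : String)).toList.length = 1 from rfl]
        omega
      · rw [if_neg h1]
        by_cases h2 : t = ";"
        · rw [if_pos h2, ih stk hstk, pvG_append, pvGLines', pvG_nil, h2]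
          rw [show ((";" : String)).toList.length = 1 from rfl]
          omega
        · rw [if_neg h2]
          by_cases h3 : PySem.Str.upper t ∈ pvKwsB ∨ PySem.Str.startswith t "--" = true
          · rw [if_pos h3]
            by_cases h4 : stk = []
            · rw [if_pos h4, ih [] (by simp), pvGLines', pvG_single, pvG_nil, h4, pvG_nil]
              omega
            · rw [if_neg h4]
              match stk, h4 with
              | nxt :: stk', _ =>
                have hstk' : stk'.length ≤ n := by
                  simp only [List.length_cons] at hlen ⊢
                  omega
                rw [pvG_cons]
                by_cases h5 : PySem.Str.upper t = "GROUP" ∨ PySem.Str.upper t = "ORDER" ∨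
                    PySem.Str.upper t = "UNION"
                · rw [if_pos h5]
                  simp only [List.headI_cons, List.tail_cons]
                  by_cases h6 : PySem.Str.upper nxt =
                      (if PySem.Str.upper t = "UNION" then ("ALL" : String) else "BY")
                  · rw [if_pos h6, ih stk' hstk', pvGLines', pvG_single]
                    have hnl : nxt.toList.length =
                        (if PySem.Str.upper t = "UNION" then ("ALL" : String) else "BY").toList.length := by
                      rw [← pvUpperLen nxt, h6]
                    have hml : (PySem.Str.upper t ++ " " ++
                        (if PySem.Str.upper t = "UNION" then ("ALL" : String) else "BY")).toList.length =
                        t.toList.length + 1 +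
                        (if PySem.Str.upper t = "UNION" then ("ALL" : String) else "BY").toList.length := by
                      rw [String.toList_append, String.toList_append, List.length_append,
                        List.length_append, pvUpperLen, hsp1]
                    omega
                  · rw [if_neg h6, ih (nxt :: stk') (by simpa using hlen), pvGLines',
                      pvG_single, pvG_cons]
                    omega
                · rw [if_neg h5, ih (nxt :: stk') (by simpa using hlen), pvGLines',
                    pvG_single, pvG_cons]
                  omega
          · rw [if_neg h3, ih stk hstk, pvG_append]
            omega

-- scanner decomposition lemmas
theorem pvScanTrue : ∀ (l : List Char), pvScan true l = pvScan false (l.dropWhile pvWordCharA) := by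
  intro l
  induction l with
  | nil => rfl
  | cons c t ih =>
    by_cases hc : pvWordCharA c = true
    · rw [show pvScan true (c :: t) =
          ((!true && pvWordCharA c && pvHit (c :: t)) || pvScan (pvWordCharA c) t) from rfl]
      rw [List.dropWhile_cons, if_pos hc, hc]
      simpa using ih
    · have hc' : pvWordCharA c = false := by simpa using hc
      rw [show pvScan true (c :: t) =
          ((!true && pvWordCharA c && pvHit (c :: t)) || pvScan (pvWordCharA c) t) from rfl,
        List.dropWhile_cons, if_neg (by simp [hc']),
        show pvScan false (c :: t) =
          ((!false && pvWordCharA c && pvHit (c :: t)) || pvScan (pvWordCharA c) t) from rfl]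
      simp [hc']

theorem pvScanWs : ∀ (l : List Char), pvScan false l = pvScan false (l.dropWhile PySem.Chars.isspace) := by
  intro l
  induction l with
  | nil => rfl
  | cons c t ih =>
    by_cases hc : PySem.Chars.isspace c = true
    · have hw : pvWordCharA c = false := by simp [pvWordCharA, hc]
      rw [show pvScan false (c :: t) =
          ((!false && pvWordCharA c && pvHit (c :: t)) || pvScan (pvWordCharA c) t) from rfl,
        List.dropWhile_cons, if_pos hc, hw]
      simpa using ih
    · rw [List.dropWhile_cons, if_neg hc]

theorem pvScanWord {cs : List Char} {c : Char} {rest : List Char}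
    (h : cs.dropWhile PySem.Chars.isspace = c :: rest) (hw : pvWordCharA c = true) :
    pvScan false cs = (pvHit (c :: rest) || pvScan false ((c :: rest).dropWhile pvWordCharA)) := by
  rw [pvScanWs, h,
    show pvScan false (c :: rest) =
      ((!false && pvWordCharA c && pvHit (c :: rest)) || pvScan (pvWordCharA c) rest) from rfl,
    hw, List.dropWhile_cons, if_pos hw]
  simp [pvScanTrue]

theorem pvScanSep {cs : List Char} {c : Char} {rest : List Char}
    (h : cs.dropWhile PySem.Chars.isspace = c :: rest) (hw : pvWordCharA c = false) :
    pvScan false cs = pvScan false rest := by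
  rw [pvScanWs, h,
    show pvScan false (c :: rest) =
      ((!false && pvWordCharA c && pvHit (c :: rest)) || pvScan (pvWordCharA c) rest) from rfl,
    hw]
  simp

theorem pvScanNil {cs : List Char} (h : cs.dropWhile PySem.Chars.isspace = []) :
    pvScan false cs = false := by
  rw [pvScanWs, h]; rfl

-- A's output weight dominates the token weight, strictly when the scanner fires
theorem pvToListInj {A B : String} (h : A.toList = B.toList) : A = B := by
  have h2 := congrArg String.ofList h
  rwa [String.ofList_toList, String.ofList_toList] at h2

def pvBon (b : Bool) : Nat := if b = true then 1 else 0

theorem pvBon_true : pvBon true = 1 := rfl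

theorem pvBon_false : pvBon false = 0 := rfl

set_option maxHeartbeats 1000000 in
set_option maxRecDepth 8192 in
theorem pvAGe : ∀ (n : Nat) (cs : List Char), cs.length ≤ n → ∀ (lines cur : List String),
    pvG lines + pvG cur + pvGC (pvTok cs) + pvBon (pvScan false cs) ≤
      pvG (pvALoop cs lines cur) := by
  intro n
  induction n with
  | zero =>
    intro cs h lines cur
    have hcs : cs = [] := by simpa using h
    subst hcs
    have hnil : pvALoop [] lines cur =
        lines ++ (if cur = [] then [] else [PySem.Str.join " " cur]) := by
      rw [pvALoop.eq_def]
      rfl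
    rw [pvTokNil rfl, hnil, show pvScan false [] = false from rfl, pvBon_false,
      show pvGC [] = 0 from rfl]
    by_cases hcur : cur = []
    · rw [if_pos hcur, List.append_nil, hcur, pvG_nil]
      omega
    · rw [if_neg hcur, pvG_append, pvJoinG cur hcur]
      omega
  | succ n ih =>
    intro cs hlen lines cur
    rcases h : cs.dropWhile PySem.Chars.isspace with _ | ⟨c, rest⟩
    · have hnil : pvALoop cs lines cur =
          lines ++ (if cur = [] then [] else [PySem.Str.join " " cur]) := by
        rw [pvALoop.eq_def, h]
      rw [pvTokNil h, pvScanNil h, pvBon_false, hnil, show pvGC [] = 0 from rfl]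
      by_cases hcur : cur = []
      · rw [if_pos hcur, List.append_nil, hcur, pvG_nil]
        omega
      · rw [if_neg hcur, pvG_append, pvJoinG cur hcur]
        omega
    · have hlencons : (c :: rest).length ≤ cs.length := by
        rw [← h]; exact List.length_dropWhile_le _ _
      simp only [List.length_cons] at hlencons
      have hrest_le : rest.length ≤ n := by omega
      have hcw : PySem.Chars.isspace c = false := pvHeadDropWhile h
      rw [pvALoop.eq_def, h, pvTokCons h]
      by_cases hsep : c = ',' ∨ c = ';'
      · have hwF : pvWordCharA c = false := by
          rcases hsep with rfl | rfl <;> decide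
        rw [pvScanSep h hwF]
        simp only [if_pos hsep]
        rw [pvGC_cons]
        rcases hsep with rfl | rfl
        · rw [show String.ofList [','] = "," from rfl]
          by_cases hcur : cur = []
          · rw [if_neg (show ¬(("," : String) = "," ∧ cur ≠ []) from by simp [hcur]),
              if_neg (show ¬(("," : String) = ";") from by decide),
              if_neg (show ¬(PySem.Str.upper "," ∈ pvKwsA ∨
                PySem.Str.startswith "," "--" = true) from by decide)]
            refine le_trans ?_ (ih rest hrest_le lines (cur ++ [","]))
            rw [pvG_append, show (("," : String)).toList.length = 1 from rfl]
            simp only [List.length_cons, List.length_nil]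
            omega
          · rw [if_pos (show ("," : String) = "," ∧ cur ≠ [] from ⟨rfl, hcur⟩)]
            refine le_trans ?_ (ih rest hrest_le
              (lines ++ [PySem.Str.join " " cur]) [","])
            rw [pvG_append, pvJoinG cur hcur, show pvG [","] = 2 from rfl]
            simp only [List.length_cons, List.length_nil]
            omega
        · rw [show String.ofList [';'] = ";" from rfl,
            if_neg (show ¬((";" : String) = "," ∧ cur ≠ []) from by simp),
            if_pos (show (";" : String) = ";" from rfl)]
          refine le_trans ?_ (ih rest hrest_le
            ((if cur = [] then lines else lines ++ [PySem.Str.join " " cur]) ++ [";"]) [])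
          rw [pvG_append, pvGLines', pvG_nil, show ((";" : String)).toList.length = 1 from rfl]
          simp only [List.length_cons, List.length_nil]
          omega
      · have hwc : pvWordCharA c = true := by
          simp [pvWordCharA, hcw]
          constructor <;> (intro hc; exact hsep (by simp [hc]))
        have hscanW := pvScanWord h hwc
        simp only [if_neg hsep]
        rw [pvGC_cons]
        have htokw : ∀ x ∈ (c :: rest).takeWhile pvWordCharA, pvWordCharA x = true :=
          fun x hx => List.mem_takeWhile_imp hx
        have hr2_le : ((c :: rest).dropWhile pvWordCharA).length ≤ n := by
          rw [List.dropWhile_cons, if_pos hwc]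
          have := List.length_dropWhile_le pvWordCharA rest
          omega
        obtain ⟨hs1, hs2⟩ := pvStrOfListNeSep _ htokw
        rw [if_neg (show ¬(String.ofList ((c :: rest).takeWhile pvWordCharA) = "," ∧
            cur ≠ []) from fun hc => hs1 hc.1), if_neg hs2]
        by_cases hkw : PySem.Str.upper (String.ofList ((c :: rest).takeWhile pvWordCharA)) ∈ pvKwsA
            ∨ PySem.Str.startswith (String.ofList ((c :: rest).takeWhile pvWordCharA)) "--" = true
        · rw [if_pos hkw]
          rcases h3 : (List.dropWhile pvWordCharA (c :: rest)).dropWhile PySem.Chars.isspace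
            with _ | ⟨d, tl⟩
          · -- nothing after the keyword
            have hhitF : pvHit (c :: rest) = false := by
              cases hHit : pvHit (c :: rest)
              · rfl
              exfalso
              obtain ⟨kw, hkwm, -, h2, -⟩ := (pvHit_iff _).1 hHit
              have hafter0 : pvAfterTok (c :: rest) = [] := by rw [pvAfterTok]; exact h3
              rw [hafter0] at h2
              simp only [pvPats, List.mem_cons, List.not_mem_nil, or_false] at hkwm
              rcases hkwm with rfl | rfl | rfl <;> simp [PySem.Chars.upper] at h2
            rw [hscanW, hhitF, Bool.false_or,
              if_neg (fun hc => hc.2.2 rfl)]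
            refine le_trans ?_ (ih ((c :: rest).dropWhile pvWordCharA) hr2_le
              (if cur = [] then lines else lines ++ [PySem.Str.join " " cur])
              [String.ofList ((c :: rest).takeWhile pvWordCharA)])
            rw [pvGLines', pvG_single, String.toList_ofList]
            omega
          · have hne2 : List.dropWhile pvWordCharA (c :: rest) ≠ [] := by
              intro he; rw [he] at h3; simp at h3
            have hd_notws : PySem.Chars.isspace d = false := pvHeadDropWhile h3
            have hafterEq : pvAfterTok (c :: rest) = d :: tl := by
              rw [pvAfterTok]; exact h3
            have hdtl_le : (d :: tl).length ≤ ((c :: rest).dropWhile pvWordCharA).length := by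
              rw [← h3]; exact List.length_dropWhile_le _ _
            simp only [List.length_cons] at hdtl_le
            by_cases hdsep : d = ',' ∨ d = ';'
            · -- next token is ',' or ';'
              have hnword : pvWordCharA d = false := by
                rcases hdsep with rfl | rfl <;> decide
              have hhitF : pvHit (c :: rest) = false := by
                cases hHit : pvHit (c :: rest)
                · rfl
                exfalso
                obtain ⟨kw, hkwm, -, h2, -⟩ := (pvHit_iff _).1 hHit
                rw [hafterEq] at h2
                simp only [pvPats, List.mem_cons, List.not_mem_nil, or_false] at hkwm
                rcases hkwm with rfl | rfl | rfl
                · have hdm := pvTakeAllWord (d :: tl) ['B', 'Y'] 2 pvWBY h2 d (by simp)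
                  rw [hnword] at hdm; exact absurd hdm (by simp)
                · have hdm := pvTakeAllWord (d :: tl) ['B', 'Y'] 2 pvWBY h2 d (by simp)
                  rw [hnword] at hdm; exact absurd hdm (by simp)
                · have hdm := pvTakeAllWord (d :: tl) ['A', 'L', 'L'] 3 pvWALL h2 d (by simp)
                  rw [hnword] at hdm; exact absurd hdm (by simp)
              have hcondA2 : ¬ PySem.Chars.upper ((d :: tl).take 2) = ['B', 'Y'] := by
                intro hcd
                have hdm := pvTakeAllWord (d :: tl) ['B', 'Y'] 2 pvWBY hcd d (by simp)
                rw [hnword] at hdm; exact absurd hdm (by simp)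
              have hcondA3 : ¬ PySem.Chars.upper ((d :: tl).take 3) = ['A', 'L', 'L'] := by
                intro hcd
                have hdm := pvTakeAllWord (d :: tl) ['A', 'L', 'L'] 3 pvWALL hcd d (by simp)
                rw [hnword] at hdm; exact absurd hdm (by simp)
              rw [hscanW, hhitF, Bool.false_or]
              by_cases hGOU : PySem.Str.upper (String.ofList
                  ((c :: rest).takeWhile pvWordCharA)) = "GROUP" ∨
                  PySem.Str.upper (String.ofList ((c :: rest).takeWhile pvWordCharA)) = "ORDER" ∨
                  PySem.Str.upper (String.ofList ((c :: rest).takeWhile pvWordCharA)) = "UNION"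
              · rw [if_pos ⟨hGOU, hne2, by simp [h3]⟩,
                  if_neg (fun hc => hcondA2 hc.2), if_neg (fun hc => hcondA2 hc.2),
                  if_neg (fun hc => hcondA3 hc.2)]
                refine le_trans ?_ (ih ((c :: rest).dropWhile pvWordCharA) hr2_le
                  (if cur = [] then lines else lines ++ [PySem.Str.join " " cur])
                  [String.ofList ((c :: rest).takeWhile pvWordCharA)])
                rw [pvGLines', pvG_single, String.toList_ofList]
                omega
              · rw [if_neg (fun hc => hGOU hc.1)]
                refine le_trans ?_ (ih ((c :: rest).dropWhile pvWordCharA) hr2_le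
                  (if cur = [] then lines else lines ++ [PySem.Str.join " " cur])
                  [String.ofList ((c :: rest).takeWhile pvWordCharA)])
                rw [pvGLines', pvG_single, String.toList_ofList]
                omega
            · -- next token is a word token
              have hdw : pvWordCharA d = true := by
                simp [pvWordCharA, hd_notws]
                constructor <;> (intro hc; exact hdsep (by simp [hc]))
              by_cases hGOU : PySem.Str.upper (String.ofList
                  ((c :: rest).takeWhile pvWordCharA)) = "GROUP" ∨
                  PySem.Str.upper (String.ofList ((c :: rest).takeWhile pvWordCharA)) = "ORDER" ∨
                  PySem.Str.upper (String.ofList ((c :: rest).takeWhile pvWordCharA)) = "UNION"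
              · rcases hGOU with hcase | hcase | hcase <;> rw [hcase]
                · -- GROUP
                  have htokc := (pvStrUpperOfList _ _).1 hcase
                  have htoklen : ((c :: rest).takeWhile pvWordCharA).length = 5 := by
                    have := congrArg List.length htokc
                    simpa [PySem.Chars.upper] using this
                  by_cases hcond : PySem.Chars.upper ((d :: tl).take 2) = ['B', 'Y']
                  · -- A merges (cond true); the bonus depends on whether the token is longer
                    have hall := pvTakeAllWord (d :: tl) ['B', 'Y'] 2 pvWBY hcond
                    obtain ⟨htw0, hdw0⟩ := pvTakeDropWhileOfTake pvWordCharA 2 (d :: tl) hall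
                    have htklen : ((d :: tl).take 2).length = 2 := by
                      have := congrArg List.length hcond
                      simpa [PySem.Chars.upper] using this
                    have hTok2 : pvTok ((c :: rest).dropWhile pvWordCharA) =
                        ((d :: tl).takeWhile pvWordCharA) ::
                          pvTok ((d :: tl).dropWhile pvWordCharA) := by
                      rw [pvTokCons h3, if_neg hdsep]
                    have had_le : ((d :: tl).drop 2).length ≤ n := by
                      have h10 : ((d :: tl).drop 2).length = tl.length + 1 - 2 := by simp
                      omega
                    rw [if_pos ⟨Or.inl rfl, hne2, by simp [h3]⟩, if_pos ⟨rfl, hcond⟩]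
                    refine le_trans ?_ (ih ((d :: tl).drop 2) had_le
                      (if cur = [] then lines else lines ++ [PySem.Str.join " " cur]) ["GROUP BY"])
                    rw [pvGLines', hTok2, pvGC_cons, pvG_single, String.toList_ofList]
                    simp only [List.length_cons, List.length_nil]
                    have htwlen : ((d :: tl).takeWhile pvWordCharA).length =
                        2 + (((d :: tl).drop 2).takeWhile pvWordCharA).length := by
                      rw [htw0, List.length_append, htklen]
                    by_cases hlong : ((d :: tl).drop 2).takeWhile pvWordCharA = []
                    · -- next token is exactly the pattern: no leftover on either side
                      have hdw2 : (d :: tl).dropWhile pvWordCharA = (d :: tl).drop 2 := by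
                        rw [hdw0, pvTWnil hlong]
                      have htwq : (d :: tl).takeWhile pvWordCharA = (d :: tl).take 2 := by
                        rw [htw0, hlong, List.append_nil]
                      have hhitF : pvHit (c :: rest) = false := by
                        cases hHit : pvHit (c :: rest)
                        · rfl
                        exfalso
                        obtain ⟨kw, hkwm, h1, h2, h3'⟩ := (pvHit_iff _).1 hHit
                        have hkq : kw.1 = "GROUP" := pvToListInj (h1.symm.trans htokc)
                        simp only [pvPats, List.mem_cons, List.not_mem_nil, or_false] at hkwm
                        rcases hkwm with rfl | rfl | rfl <;>
                          first
                            | exact absurd hkq (by decide)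
                            | (rw [hafterEq] at h3'; exact h3' hlong)
                      have hB : pvScan false cs = pvScan false ((d :: tl).drop 2) := by
                        rw [hscanW, hhitF, Bool.false_or, pvScanWs, h3,
                          pvScanWord (cs := d :: tl)
                            (by rw [List.dropWhile_cons, if_neg (by simp [hd_notws])]) hdw]
                        have hAF : pvHit (d :: tl) = false := by
                          cases hHit : pvHit (d :: tl)
                          · rfl
                          exfalso
                          obtain ⟨kw, hkwm, h1, -, -⟩ := (pvHit_iff _).1 hHit
                          rw [htwq, hcond] at h1
                          simp only [pvPats, List.mem_cons, List.not_mem_nil, or_false] at hkwm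
                          rcases hkwm with rfl | rfl | rfl <;> exact absurd h1 (by decide)
                        rw [hAF, Bool.false_or, hdw2]
                      rw [hB]
                      have hlong0 : (((d :: tl).drop 2).takeWhile pvWordCharA).length = 0 := by
                        rw [hlong]; rfl
                      have hGCad : pvGC (pvTok ((d :: tl).dropWhile pvWordCharA)) =
                          pvGC (pvTok ((d :: tl).drop 2)) := by rw [hdw2]
                      omega
                    · -- the next token strictly extends the pattern: the scanner fires
                      have hhitT : pvHit (c :: rest) = true := by
                        refine (pvHit_iff _).2 ⟨("GROUP", 2, "BY"), by simp [pvPats],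
                          htokc, ?_, ?_⟩
                        · rw [hafterEq]; exact hcond
                        · rw [hafterEq]; exact hlong
                      have hB1 : pvScan false cs = true := by rw [hscanW, hhitT]; rfl
                      rw [hB1, pvBon_true]
                      obtain ⟨e, l2, hel⟩ : ∃ e l2, (d :: tl).drop 2 = e :: l2 := by
                        cases hx : (d :: tl).drop 2 with
                        | nil => rw [hx] at hlong; exact absurd rfl hlong
                        | cons e l2 => exact ⟨e, l2, rfl⟩
                      have hew : pvWordCharA e = true := by
                        rw [hel] at hlong
                        by_contra hne
                        rw [List.takeWhile_cons, if_neg hne] at hlong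
                        exact hlong rfl
                      have he1 : PySem.Chars.isspace e = false := by
                        simp [pvWordCharA] at hew; exact hew.1.1
                      have he2 : ¬ e = ',' := by
                        simp [pvWordCharA] at hew; exact hew.1.2
                      have he3 : ¬ e = ';' := by
                        simp [pvWordCharA] at hew; exact hew.2
                      have hTokAd : pvTok ((d :: tl).drop 2) =
                          (((d :: tl).drop 2).takeWhile pvWordCharA) ::
                            pvTok (((d :: tl).drop 2).dropWhile pvWordCharA) := by
                        rw [pvTokCons (cs := (d :: tl).drop 2) (c := e) (rest := l2)
                          (by rw [hel, List.dropWhile_cons, if_neg (by simp [he1])]),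
                          if_neg (by rintro (rfl | rfl)
                                     · exact he2 rfl
                                     · exact he3 rfl), ← hel]
                      have hdwad : (d :: tl).dropWhile pvWordCharA =
                          ((d :: tl).drop 2).dropWhile pvWordCharA := hdw0
                      rw [hTokAd, pvGC_cons, hdwad]
                      have hBonNN : 0 ≤ pvBon (pvScan false
                          (((d :: tl).drop 2).dropWhile pvWordCharA)) := Nat.zero_le _
                      omega
                  · -- no merge on either side
                    have hhitF : pvHit (c :: rest) = false := by
                      cases hHit : pvHit (c :: rest)
                      · rfl
                      exfalso
                      obtain ⟨kw, hkwm, h1, h2, -⟩ := (pvHit_iff _).1 hHit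
                      have hkq : kw.1 = "GROUP" := pvToListInj (h1.symm.trans htokc)
                      simp only [pvPats, List.mem_cons, List.not_mem_nil, or_false] at hkwm
                      rcases hkwm with rfl | rfl | rfl <;>
                        first
                          | exact absurd hkq (by decide)
                          | (rw [hafterEq] at h2; exact hcond h2)
                    rw [hscanW, hhitF, Bool.false_or, if_pos ⟨Or.inl rfl, hne2, by simp [h3]⟩, if_neg (fun hc => hcond hc.2), if_neg (fun hc => absurd hc.1 (by decide)), if_neg (fun hc => absurd hc.1 (by decide))]
                    refine le_trans ?_ (ih ((c :: rest).dropWhile pvWordCharA) hr2_le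
                      (if cur = [] then lines else lines ++ [PySem.Str.join " " cur])
                      [String.ofList ((c :: rest).takeWhile pvWordCharA)])
                    rw [pvGLines', pvG_single, String.toList_ofList]
                    omega
                · -- ORDER
                  have htokc := (pvStrUpperOfList _ _).1 hcase
                  have htoklen : ((c :: rest).takeWhile pvWordCharA).length = 5 := by
                    have := congrArg List.length htokc
                    simpa [PySem.Chars.upper] using this
                  by_cases hcond : PySem.Chars.upper ((d :: tl).take 2) = ['B', 'Y']
                  · -- A merges (cond true); the bonus depends on whether the token is longer
                    have hall := pvTakeAllWord (d :: tl) ['B', 'Y'] 2 pvWBY hcond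
                    obtain ⟨htw0, hdw0⟩ := pvTakeDropWhileOfTake pvWordCharA 2 (d :: tl) hall
                    have htklen : ((d :: tl).take 2).length = 2 := by
                      have := congrArg List.length hcond
                      simpa [PySem.Chars.upper] using this
                    have hTok2 : pvTok ((c :: rest).dropWhile pvWordCharA) =
                        ((d :: tl).takeWhile pvWordCharA) ::
                          pvTok ((d :: tl).dropWhile pvWordCharA) := by
                      rw [pvTokCons h3, if_neg hdsep]
                    have had_le : ((d :: tl).drop 2).length ≤ n := by
                      have h10 : ((d :: tl).drop 2).length = tl.length + 1 - 2 := by simp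
                      omega
                    rw [if_pos ⟨Or.inr (Or.inl rfl), hne2, by simp [h3]⟩, if_neg (fun hc => absurd hc.1 (by decide)), if_pos ⟨rfl, hcond⟩]
                    refine le_trans ?_ (ih ((d :: tl).drop 2) had_le
                      (if cur = [] then lines else lines ++ [PySem.Str.join " " cur]) ["ORDER BY"])
                    rw [pvGLines', hTok2, pvGC_cons, pvG_single, String.toList_ofList]
                    simp only [List.length_cons, List.length_nil]
                    have htwlen : ((d :: tl).takeWhile pvWordCharA).length =
                        2 + (((d :: tl).drop 2).takeWhile pvWordCharA).length := by
                      rw [htw0, List.length_append, htklen]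
                    by_cases hlong : ((d :: tl).drop 2).takeWhile pvWordCharA = []
                    · -- next token is exactly the pattern: no leftover on either side
                      have hdw2 : (d :: tl).dropWhile pvWordCharA = (d :: tl).drop 2 := by
                        rw [hdw0, pvTWnil hlong]
                      have htwq : (d :: tl).takeWhile pvWordCharA = (d :: tl).take 2 := by
                        rw [htw0, hlong, List.append_nil]
                      have hhitF : pvHit (c :: rest) = false := by
                        cases hHit : pvHit (c :: rest)
                        · rfl
                        exfalso
                        obtain ⟨kw, hkwm, h1, h2, h3'⟩ := (pvHit_iff _).1 hHit
                        have hkq : kw.1 = "ORDER" := pvToListInj (h1.symm.trans htokc)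
                        simp only [pvPats, List.mem_cons, List.not_mem_nil, or_false] at hkwm
                        rcases hkwm with rfl | rfl | rfl <;>
                          first
                            | exact absurd hkq (by decide)
                            | (rw [hafterEq] at h3'; exact h3' hlong)
                      have hB : pvScan false cs = pvScan false ((d :: tl).drop 2) := by
                        rw [hscanW, hhitF, Bool.false_or, pvScanWs, h3,
                          pvScanWord (cs := d :: tl)
                            (by rw [List.dropWhile_cons, if_neg (by simp [hd_notws])]) hdw]
                        have hAF : pvHit (d :: tl) = false := by
                          cases hHit : pvHit (d :: tl)
                          · rfl
                          exfalso
                          obtain ⟨kw, hkwm, h1, -, -⟩ := (pvHit_iff _).1 hHit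
                          rw [htwq, hcond] at h1
                          simp only [pvPats, List.mem_cons, List.not_mem_nil, or_false] at hkwm
                          rcases hkwm with rfl | rfl | rfl <;> exact absurd h1 (by decide)
                        rw [hAF, Bool.false_or, hdw2]
                      rw [hB]
                      have hlong0 : (((d :: tl).drop 2).takeWhile pvWordCharA).length = 0 := by
                        rw [hlong]; rfl
                      have hGCad : pvGC (pvTok ((d :: tl).dropWhile pvWordCharA)) =
                          pvGC (pvTok ((d :: tl).drop 2)) := by rw [hdw2]
                      omega
                    · -- the next token strictly extends the pattern: the scanner fires
                      have hhitT : pvHit (c :: rest) = true := by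
                        refine (pvHit_iff _).2 ⟨("ORDER", 2, "BY"), by simp [pvPats],
                          htokc, ?_, ?_⟩
                        · rw [hafterEq]; exact hcond
                        · rw [hafterEq]; exact hlong
                      have hB1 : pvScan false cs = true := by rw [hscanW, hhitT]; rfl
                      rw [hB1, pvBon_true]
                      obtain ⟨e, l2, hel⟩ : ∃ e l2, (d :: tl).drop 2 = e :: l2 := by
                        cases hx : (d :: tl).drop 2 with
                        | nil => rw [hx] at hlong; exact absurd rfl hlong
                        | cons e l2 => exact ⟨e, l2, rfl⟩
                      have hew : pvWordCharA e = true := by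
                        rw [hel] at hlong
                        by_contra hne
                        rw [List.takeWhile_cons, if_neg hne] at hlong
                        exact hlong rfl
                      have he1 : PySem.Chars.isspace e = false := by
                        simp [pvWordCharA] at hew; exact hew.1.1
                      have he2 : ¬ e = ',' := by
                        simp [pvWordCharA] at hew; exact hew.1.2
                      have he3 : ¬ e = ';' := by
                        simp [pvWordCharA] at hew; exact hew.2
                      have hTokAd : pvTok ((d :: tl).drop 2) =
                          (((d :: tl).drop 2).takeWhile pvWordCharA) ::
                            pvTok (((d :: tl).drop 2).dropWhile pvWordCharA) := by
                        rw [pvTokCons (cs := (d :: tl).drop 2) (c := e) (rest := l2)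
                          (by rw [hel, List.dropWhile_cons, if_neg (by simp [he1])]),
                          if_neg (by rintro (rfl | rfl)
                                     · exact he2 rfl
                                     · exact he3 rfl), ← hel]
                      have hdwad : (d :: tl).dropWhile pvWordCharA =
                          ((d :: tl).drop 2).dropWhile pvWordCharA := hdw0
                      rw [hTokAd, pvGC_cons, hdwad]
                      have hBonNN : 0 ≤ pvBon (pvScan false
                          (((d :: tl).drop 2).dropWhile pvWordCharA)) := Nat.zero_le _
                      omega
                  · -- no merge on either side
                    have hhitF : pvHit (c :: rest) = false := by
                      cases hHit : pvHit (c :: rest)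
                      · rfl
                      exfalso
                      obtain ⟨kw, hkwm, h1, h2, -⟩ := (pvHit_iff _).1 hHit
                      have hkq : kw.1 = "ORDER" := pvToListInj (h1.symm.trans htokc)
                      simp only [pvPats, List.mem_cons, List.not_mem_nil, or_false] at hkwm
                      rcases hkwm with rfl | rfl | rfl <;>
                        first
                          | exact absurd hkq (by decide)
                          | (rw [hafterEq] at h2; exact hcond h2)
                    rw [hscanW, hhitF, Bool.false_or, if_pos ⟨Or.inr (Or.inl rfl), hne2, by simp [h3]⟩, if_neg (fun hc => absurd hc.1 (by decide)), if_neg (fun hc => hcond hc.2), if_neg (fun hc => absurd hc.1 (by decide))]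
                    refine le_trans ?_ (ih ((c :: rest).dropWhile pvWordCharA) hr2_le
                      (if cur = [] then lines else lines ++ [PySem.Str.join " " cur])
                      [String.ofList ((c :: rest).takeWhile pvWordCharA)])
                    rw [pvGLines', pvG_single, String.toList_ofList]
                    omega
                · -- UNION
                  have htokc := (pvStrUpperOfList _ _).1 hcase
                  have htoklen : ((c :: rest).takeWhile pvWordCharA).length = 5 := by
                    have := congrArg List.length htokc
                    simpa [PySem.Chars.upper] using this
                  by_cases hcond : PySem.Chars.upper ((d :: tl).take 3) = ['A', 'L', 'L']
                  · -- A merges (cond true); the bonus depends on whether the token is longer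
                    have hall := pvTakeAllWord (d :: tl) ['A', 'L', 'L'] 3 pvWALL hcond
                    obtain ⟨htw0, hdw0⟩ := pvTakeDropWhileOfTake pvWordCharA 3 (d :: tl) hall
                    have htklen : ((d :: tl).take 3).length = 3 := by
                      have := congrArg List.length hcond
                      simpa [PySem.Chars.upper] using this
                    have hTok2 : pvTok ((c :: rest).dropWhile pvWordCharA) =
                        ((d :: tl).takeWhile pvWordCharA) ::
                          pvTok ((d :: tl).dropWhile pvWordCharA) := by
                      rw [pvTokCons h3, if_neg hdsep]
                    have had_le : ((d :: tl).drop 3).length ≤ n := by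
                      have h10 : ((d :: tl).drop 3).length = tl.length + 1 - 3 := by simp
                      omega
                    rw [if_pos ⟨Or.inr (Or.inr rfl), hne2, by simp [h3]⟩, if_neg (fun hc => absurd hc.1 (by decide)), if_neg (fun hc => absurd hc.1 (by decide)), if_pos ⟨rfl, hcond⟩]
                    refine le_trans ?_ (ih ((d :: tl).drop 3) had_le
                      (if cur = [] then lines else lines ++ [PySem.Str.join " " cur]) ["UNION ALL"])
                    rw [pvGLines', hTok2, pvGC_cons, pvG_single, String.toList_ofList]
                    simp only [List.length_cons, List.length_nil]
                    have htwlen : ((d :: tl).takeWhile pvWordCharA).length =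
                        3 + (((d :: tl).drop 3).takeWhile pvWordCharA).length := by
                      rw [htw0, List.length_append, htklen]
                    by_cases hlong : ((d :: tl).drop 3).takeWhile pvWordCharA = []
                    · -- next token is exactly the pattern: no leftover on either side
                      have hdw2 : (d :: tl).dropWhile pvWordCharA = (d :: tl).drop 3 := by
                        rw [hdw0, pvTWnil hlong]
                      have htwq : (d :: tl).takeWhile pvWordCharA = (d :: tl).take 3 := by
                        rw [htw0, hlong, List.append_nil]
                      have hhitF : pvHit (c :: rest) = false := by
                        cases hHit : pvHit (c :: rest)
                        · rfl
                        exfalso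
                        obtain ⟨kw, hkwm, h1, h2, h3'⟩ := (pvHit_iff _).1 hHit
                        have hkq : kw.1 = "UNION" := pvToListInj (h1.symm.trans htokc)
                        simp only [pvPats, List.mem_cons, List.not_mem_nil, or_false] at hkwm
                        rcases hkwm with rfl | rfl | rfl <;>
                          first
                            | exact absurd hkq (by decide)
                            | (rw [hafterEq] at h3'; exact h3' hlong)
                      have hB : pvScan false cs = pvScan false ((d :: tl).drop 3) := by
                        rw [hscanW, hhitF, Bool.false_or, pvScanWs, h3,
                          pvScanWord (cs := d :: tl)
                            (by rw [List.dropWhile_cons, if_neg (by simp [hd_notws])]) hdw]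
                        have hAF : pvHit (d :: tl) = false := by
                          cases hHit : pvHit (d :: tl)
                          · rfl
                          exfalso
                          obtain ⟨kw, hkwm, h1, -, -⟩ := (pvHit_iff _).1 hHit
                          rw [htwq, hcond] at h1
                          simp only [pvPats, List.mem_cons, List.not_mem_nil, or_false] at hkwm
                          rcases hkwm with rfl | rfl | rfl <;> exact absurd h1 (by decide)
                        rw [hAF, Bool.false_or, hdw2]
                      rw [hB]
                      have hlong0 : (((d :: tl).drop 3).takeWhile pvWordCharA).length = 0 := by
                        rw [hlong]; rfl
                      have hGCad : pvGC (pvTok ((d :: tl).dropWhile pvWordCharA)) =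
                          pvGC (pvTok ((d :: tl).drop 3)) := by rw [hdw2]
                      omega
                    · -- the next token strictly extends the pattern: the scanner fires
                      have hhitT : pvHit (c :: rest) = true := by
                        refine (pvHit_iff _).2 ⟨("UNION", 3, "ALL"), by simp [pvPats],
                          htokc, ?_, ?_⟩
                        · rw [hafterEq]; exact hcond
                        · rw [hafterEq]; exact hlong
                      have hB1 : pvScan false cs = true := by rw [hscanW, hhitT]; rfl
                      rw [hB1, pvBon_true]
                      obtain ⟨e, l2, hel⟩ : ∃ e l2, (d :: tl).drop 3 = e :: l2 := by
                        cases hx : (d :: tl).drop 3 with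
                        | nil => rw [hx] at hlong; exact absurd rfl hlong
                        | cons e l2 => exact ⟨e, l2, rfl⟩
                      have hew : pvWordCharA e = true := by
                        rw [hel] at hlong
                        by_contra hne
                        rw [List.takeWhile_cons, if_neg hne] at hlong
                        exact hlong rfl
                      have he1 : PySem.Chars.isspace e = false := by
                        simp [pvWordCharA] at hew; exact hew.1.1
                      have he2 : ¬ e = ',' := by
                        simp [pvWordCharA] at hew; exact hew.1.2
                      have he3 : ¬ e = ';' := by
                        simp [pvWordCharA] at hew; exact hew.2
                      have hTokAd : pvTok ((d :: tl).drop 3) =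
                          (((d :: tl).drop 3).takeWhile pvWordCharA) ::
                            pvTok (((d :: tl).drop 3).dropWhile pvWordCharA) := by
                        rw [pvTokCons (cs := (d :: tl).drop 3) (c := e) (rest := l2)
                          (by rw [hel, List.dropWhile_cons, if_neg (by simp [he1])]),
                          if_neg (by rintro (rfl | rfl)
                                     · exact he2 rfl
                                     · exact he3 rfl), ← hel]
                      have hdwad : (d :: tl).dropWhile pvWordCharA =
                          ((d :: tl).drop 3).dropWhile pvWordCharA := hdw0
                      rw [hTokAd, pvGC_cons, hdwad]
                      have hBonNN : 0 ≤ pvBon (pvScan false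
                          (((d :: tl).drop 3).dropWhile pvWordCharA)) := Nat.zero_le _
                      omega
                  · -- no merge on either side
                    have hhitF : pvHit (c :: rest) = false := by
                      cases hHit : pvHit (c :: rest)
                      · rfl
                      exfalso
                      obtain ⟨kw, hkwm, h1, h2, -⟩ := (pvHit_iff _).1 hHit
                      have hkq : kw.1 = "UNION" := pvToListInj (h1.symm.trans htokc)
                      simp only [pvPats, List.mem_cons, List.not_mem_nil, or_false] at hkwm
                      rcases hkwm with rfl | rfl | rfl <;>
                        first
                          | exact absurd hkq (by decide)
                          | (rw [hafterEq] at h2; exact hcond h2)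
                    rw [hscanW, hhitF, Bool.false_or, if_pos ⟨Or.inr (Or.inr rfl), hne2, by simp [h3]⟩, if_neg (fun hc => absurd hc.1 (by decide)), if_neg (fun hc => absurd hc.1 (by decide)), if_neg (fun hc => hcond hc.2)]
                    refine le_trans ?_ (ih ((c :: rest).dropWhile pvWordCharA) hr2_le
                      (if cur = [] then lines else lines ++ [PySem.Str.join " " cur])
                      [String.ofList ((c :: rest).takeWhile pvWordCharA)])
                    rw [pvGLines', pvG_single, String.toList_ofList]
                    omega
              · have hhitF : pvHit (c :: rest) = false := by
                  cases hHit : pvHit (c :: rest)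
                  · rfl
                  exfalso
                  obtain ⟨kw, hkwm, h1, -, -⟩ := (pvHit_iff _).1 hHit
                  simp only [pvPats, List.mem_cons, List.not_mem_nil, or_false] at hkwm
                  rcases hkwm with rfl | rfl | rfl <;>
                    exact hGOU (by
                      first
                        | exact Or.inl ((pvStrUpperOfList _ _).2 h1)
                        | exact Or.inr (Or.inl ((pvStrUpperOfList _ _).2 h1))
                        | exact Or.inr (Or.inr ((pvStrUpperOfList _ _).2 h1)))
                rw [hscanW, hhitF, Bool.false_or, if_neg (fun hc => hGOU hc.1)]
                refine le_trans ?_ (ih ((c :: rest).dropWhile pvWordCharA) hr2_le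
                  (if cur = [] then lines else lines ++ [PySem.Str.join " " cur])
                  [String.ofList ((c :: rest).takeWhile pvWordCharA)])
                rw [pvGLines', pvG_single, String.toList_ofList]
                omega
        · rw [if_neg hkw]
          have hhitF : pvHit (c :: rest) = false := by
            cases hHit : pvHit (c :: rest)
            · rfl
            exfalso
            obtain ⟨kw, hkwm, h1, -, -⟩ := (pvHit_iff _).1 hHit
            simp only [pvPats, List.mem_cons, List.not_mem_nil, or_false] at hkwm
            rcases hkwm with rfl | rfl | rfl <;>
              exact hkw (Or.inl (by rw [(pvStrUpperOfList _ _).2 h1]; simp [pvKwsA]))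
          rw [hscanW, hhitF, Bool.false_or]
          refine le_trans ?_ (ih ((c :: rest).dropWhile pvWordCharA) hr2_le
            lines (cur ++ [String.ofList ((c :: rest).takeWhile pvWordCharA)]))
          rw [pvG_append, String.toList_ofList]
          omega

-- ===== VERDICT (by name: the statements are the Claim_ definitions above) =====
theorem split_into_logical_lines_py_spec : Claim_unchanged_split_into_logical_lines_py := by
  intro sql _
  unfold Spec_split_into_logical_lines_py
  intro hnD
  have hscan : ¬ pvDiffCond (PySem.Str.strip sql).toList :=
    fun hc => hnD ((pvScanIffCond _).2 hc)
  unfold split_into_logical_lines_py split_into_logical_lines_py_alt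
  rw [pvTokensEq]
  by_cases h : PySem.Str.strip sql = ""
  · rw [if_pos h]
    have h0 : pvTok sql.toList = [] := by
      rw [← pvTokStrip, h]
      rw [pvTok.eq_def]
      simp
    rw [h0]
    rw [pvBLoop.eq_def]
    simp
  · rw [if_neg h, ← pvTokStrip]
    exact pvLoopEq (PySem.Str.strip sql).toList.length _ [] [] le_rfl hscan

theorem split_into_logical_lines_py_changed : Claim_changed_split_into_logical_lines_py := by
  unfold Claim_changed_split_into_logical_lines_py
  refine ⟨by decide, by decide, ?_, ?_, by decide⟩
  · show split_into_logical_lines_py "GROUP BYS" = ["GROUP BY S"]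
    unfold split_into_logical_lines_py
    rw [show PySem.Str.strip "GROUP BYS" = "GROUP BYS" from by decide,
      if_neg (by decide),
      show ("GROUP BYS" : String).toList = ['G','R','O','U','P',' ','B','Y','S'] from rfl]
    have e1 : pvALoop ['G','R','O','U','P',' ','B','Y','S'] [] [] =
        pvALoop ['S'] [] ["GROUP BY"] := by
      rw [pvALoop.eq_def]; rfl
    have e2 : pvALoop ['S'] [] ["GROUP BY"] = pvALoop [] [] ["GROUP BY", "S"] := by
      rw [pvALoop.eq_def]; rfl
    have e3 : pvALoop [] [] ["GROUP BY", "S"] = ["GROUP BY S"] := by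
      rw [pvALoop.eq_def]; rfl
    rw [e1, e2, e3]
  · show split_into_logical_lines_py_alt "GROUP BYS" = ["GROUP BYS"]
    unfold split_into_logical_lines_py_alt
    rw [show PySem.Str.split₀ (PySem.Str.replace
        (PySem.Str.replace "GROUP BYS" "," " , ") ";" " ; ") = ["GROUP", "BYS"] from by decide]
    have e1 : pvBLoop ["GROUP", "BYS"] [] [] = pvBLoop ["BYS"] [] ["GROUP"] := by
      rw [pvBLoop.eq_def]; rfl
    have e2 : pvBLoop ["BYS"] [] ["GROUP"] = pvBLoop [] [] ["GROUP", "BYS"] := by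
      rw [pvBLoop.eq_def]; rfl
    have e3 : pvBLoop [] [] ["GROUP", "BYS"] = ["GROUP BYS"] := by
      rw [pvBLoop.eq_def]; rfl
    rw [e1, e2, e3]

theorem split_into_logical_lines_py_tight : Claim_exact_split_into_logical_lines_py := by
  intro sql _ hD heq
  have hscan : pvScan false (PySem.Str.strip sql).toList = true := hD
  have hsne : ¬ (PySem.Str.strip sql = "") := by
    intro h0; rw [h0] at hscan; exact absurd hscan (by decide)
  unfold split_into_logical_lines_py split_into_logical_lines_py_alt at heq
  rw [if_neg hsne, pvTokensEq, ← pvTokStrip] at heq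
  have hgB : pvG (pvBLoop ((pvTok (PySem.Str.strip sql).toList).map String.ofList) [] []) =
      pvGC (pvTok (PySem.Str.strip sql).toList) := by
    rw [pvBG ((pvTok (PySem.Str.strip sql).toList).map String.ofList).length _ le_rfl,
      pvG_map_ofList]
    simp [pvG]
  have hgA := pvAGe (PySem.Str.strip sql).toList.length _ le_rfl [] []
  rw [heq, hgB, hscan, pvBon_true] at hgA
  simp [pvG] at hgA
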